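-- pv_equiv track=rewrite | github.com/eliottcassidy2000/math | 04-computation/palindromic_N_proof.py | compute_f_dp
-- ===== SOURCE A (Python) =====
-- def compute_f_dp(T, n):
--     """Compute f(d,j) = N(0,d,j) using DP Hamiltonian paths.
--     Returns f as dict, and H."""
--     full = (1 << n) - 1
--
--     # dp[mask][last] = # Ham paths visiting mask ending at last
--     dp = {}
--     for v in range(n):
--         dp[(1 << v, v)] = 1
--
--     for mask in range(1, 1 << n):
--         for last in range(n):
--             if not ((mask >> last) & 1):
--                 continue
--             cnt = dp.get((mask, last), 0)
--             if cnt == 0: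
--                 continue
--             for nxt in range(n):
--                 if (mask >> nxt) & 1:
--                     continue
--                 if T.get((last, nxt), 0) == 0:
--                     continue
--                 nkey = (mask | (1 << nxt), nxt)
--                 dp[nkey] = dp.get(nkey, 0) + cnt
--
--     # dp_suf[mask][first] = # Ham paths visiting mask starting at first
--     dp_suf = {}
--     for v in range(n):
--         dp_suf[(1 << v, v)] = 1
--     for popcount in range(2, n + 1):
--         for mask in range(1, 1 << n):
--             if bin(mask).count('1') != popcount:
--                 continue
--             for first in range(n):
--                 if not ((mask >> first) & 1):
--                     continue
--                 total = 0
--                 for nxt in range(n):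
--                     if nxt == first or not ((mask >> nxt) & 1):
--                         continue
--                     if T.get((first, nxt), 0) == 0:
--                         continue
--                     total += dp_suf.get((mask & ~(1 << first), nxt), 0)
--                 if total > 0:
--                     dp_suf[(mask, first)] = total
--
--     H = sum(dp.get((full, v), 0) for v in range(n))
--
--     # Compute f(d,j) = N(0,d,j) for d=1..n-1, j=0..n-2
--     f = [[0]*(n-1) for _ in range(n)]  # f[d][j]
--
--     for d in range(1, n):
--         # Count paths where {0, d} appears at positions {j, j+1}
--         # Two cases: 0->d at (j,j+1) if T[0,d]=1, and d->0 at (j,j+1) if T[d,0]=1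
--         for x, y in [(0, d), (d, 0)]:
--             if T.get((x, y), 0) == 0:
--                 continue
--             for j in range(n-1):
--                 pc = j + 1
--                 for prefix_mask in range(1, 1 << n):
--                     if bin(prefix_mask).count('1') != pc:
--                         continue
--                     if not ((prefix_mask >> x) & 1):
--                         continue
--                     if (prefix_mask >> y) & 1:
--                         continue
--                     pcnt = dp.get((prefix_mask, x), 0)
--                     if pcnt == 0:
--                         continue
--                     scnt = dp_suf.get((full ^ prefix_mask, y), 0)
--                     if scnt == 0:
--                         continue
--                     f[d][j] += pcnt * scnt
--
--     return f, H
-- ===== SOURCE B (Python) =====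
-- def compute_f_dp(T, n):
--     """Compute f(d,j) = N(0,d,j) using DP Hamiltonian paths.
--     Returns f as dict, and H."""
--     full = (1 << n) - 1
--
--     def ham_end(edge):
--         # cnt[(mask, last)] = # Ham paths visiting mask ending at last,
--         # by a forward push over masks in ascending order
--         cnt = {}
--         for v in range(n):
--             cnt[(1 << v, v)] = 1
--         for mask in range(1, 1 << n):
--             for last in range(n):
--                 if not ((mask >> last) & 1):
--                     continue
--                 c = cnt.get((mask, last), 0)
--                 if c == 0:
--                     continue
--                 for nxt in range(n):
--                     if (mask >> nxt) & 1:
--                         continue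
--                     if edge(last, nxt) == 0:
--                         continue
--                     nkey = (mask | (1 << nxt), nxt)
--                     cnt[nkey] = cnt.get(nkey, 0) + c
--         return cnt
--
--     # paths ending at v, and (via the reversed edge relation) paths starting at v:
--     # a path starting at v in T is a path ending at v in the transposed graph.
--     dp = ham_end(lambda a, b: T.get((a, b), 0))
--     dp_rev = ham_end(lambda a, b: T.get((b, a), 0))
--
--     H = sum(dp.get((full, v), 0) for v in range(n))
--
--     # single pass over the prefix masks per direction; position slot j = popcount-1
--     f = [[0] * (n - 1) for _ in range(n)]
--     for d in range(1, n):
--         for x, y in [(0, d), (d, 0)]: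
--             if T.get((x, y), 0) == 0:
--                 continue
--             for mask in range(1, 1 << n):
--                 j = mask.bit_count() - 1
--                 if j > n - 2:
--                     continue
--                 if not ((mask >> x) & 1) or ((mask >> y) & 1):
--                     continue
--                 f[d][j] += dp.get((mask, x), 0) * dp_rev.get((full ^ mask, y), 0)
--
--     return f, H
-- ===== Notes on version B (the rewrite author's own statement) =====
-- stated objective: faster
-- what changed: B computes the suffix-path table with the same forward push DP used for the prefix table, run on the reversed edge relation (one ham_end helper called twice, using path reversal), instead of A's separate pull-by-popcount-layer DP that rescans all 2^n masks per layer with bin(mask).count('1') guards; and B's f stage is a single pass over the prefix masks per direction accumulating into slot j = popcount-1 instead of A's rescan of all masks for every position j.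
import Mathlib
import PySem

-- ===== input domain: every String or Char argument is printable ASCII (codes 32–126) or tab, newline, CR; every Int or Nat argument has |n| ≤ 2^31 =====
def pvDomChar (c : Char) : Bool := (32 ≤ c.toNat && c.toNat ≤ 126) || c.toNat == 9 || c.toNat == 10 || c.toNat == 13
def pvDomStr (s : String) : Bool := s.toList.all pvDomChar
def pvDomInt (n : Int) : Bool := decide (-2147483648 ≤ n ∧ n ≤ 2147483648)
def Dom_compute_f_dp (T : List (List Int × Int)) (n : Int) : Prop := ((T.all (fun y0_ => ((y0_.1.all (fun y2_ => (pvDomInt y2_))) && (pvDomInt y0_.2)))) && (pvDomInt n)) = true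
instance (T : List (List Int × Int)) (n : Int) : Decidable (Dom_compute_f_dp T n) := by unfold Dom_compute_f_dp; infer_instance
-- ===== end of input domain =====

-- B computes the suffix-path table by running the SAME forward push DP on the reversed edge
-- relation (one helper used twice) instead of A's separate per-popcount-layer pull DP, and fuses
-- A's per-position f-stage scans into a single pass per direction (slot j = popcount-1);
-- objective: faster (constant-factor; the f stage drops a factor of n^2 of mask scans).


-- shared primitives (the same Python expressions occur verbatim in A and B):
-- T.get((a, b), 0) — T is the argument dict, keys arrive as List Int
def pvTget (T : List (List Int × Int)) (a b : Int) : Int :=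
  (PySem.Dict.mk T).getD [a, b] 0
-- f[d][j] += v on the rectangular list-of-lists f; exact for the nonnegative in-range
-- indices both programs use (List.set/getD with toNat)
def pvAdd2 (f : List (List Int)) (d j v : Int) : List (List Int) :=
  f.set d.toNat ((f.getD d.toNat []).set j.toNat ((f.getD d.toNat []).getD j.toNat 0 + v))

-- ===== PORT A =====
-- dp stage of A: forward push over masks ascending (loop variables v/last/nxt come from range(n),
-- mask from range(1, 1<<n), all nonnegative, so .toNat on shift amounts is exact)
def aDp (T : List (List Int × Int)) (n : Int) : PySem.Dict (Int × Int) Int :=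
  (PySem.List.pyRange 1 ((1:Int) <<< n.toNat)).foldl (fun d mask =>
    (PySem.List.pyRange 0 n).foldl (fun d last =>
      if PySem.Int.band (mask >>> last.toNat) 1 = 0 then d else
      let cnt := d.getD (mask, last) 0
      if cnt = 0 then d else
      (PySem.List.pyRange 0 n).foldl (fun d nxt =>
        if ¬ (PySem.Int.band (mask >>> nxt.toNat) 1 = 0) then d else
        if pvTget T last nxt = 0 then d else
        let nkey := (PySem.Int.bor mask ((1:Int) <<< nxt.toNat), nxt)
        d.insert nkey (d.getD nkey 0 + cnt)) d) d)
    ((PySem.List.pyRange 0 n).foldl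
      (fun d v => d.insert (((1:Int) <<< v.toNat), v) 1) PySem.Dict.empty)

-- inner body of A's dp_suf update at one mask
def pvSufBody (T : List (List Int × Int)) (n : Int)
    (d : PySem.Dict (Int × Int) Int) (mask : Int) : PySem.Dict (Int × Int) Int :=
  (PySem.List.pyRange 0 n).foldl (fun d first =>
    if PySem.Int.band (mask >>> first.toNat) 1 = 0 then d else
    let total := (PySem.List.pyRange 0 n).foldl (fun t nxt =>
      if nxt = first then t else
      if PySem.Int.band (mask >>> nxt.toNat) 1 = 0 then t else
      if pvTget T first nxt = 0 then t else
      t + d.getD (PySem.Int.band mask (Int.not ((1:Int) <<< first.toNat)), nxt) 0) 0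
    if total > 0 then d.insert (mask, first) total else d) d

-- dp_suf stage of A: per popcount layer, rescan ALL masks, guard bin(mask).count('1') != popcount
def aSuf (T : List (List Int × Int)) (n : Int) : PySem.Dict (Int × Int) Int :=
  (PySem.List.pyRange 2 (n + 1)).foldl (fun d pc =>
    (PySem.List.pyRange 1 ((1:Int) <<< n.toNat)).foldl (fun d mask =>
      if ¬ ((PySem.Str.count (PySem.Int.pyBin mask) "1" : Int) = pc) then d
      else pvSufBody T n d mask) d)
    ((PySem.List.pyRange 0 n).foldl
      (fun d v => d.insert (((1:Int) <<< v.toNat), v) 1) PySem.Dict.empty)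

-- f stage of A: for each d, direction, and each position j, rescan all prefix masks
def aF (T : List (List Int × Int)) (n : Int)
    (dp dpsuf : PySem.Dict (Int × Int) Int) : List (List Int) :=
  let full := ((1:Int) <<< n.toNat) - 1
  (PySem.List.pyRange 1 n).foldl (fun f d_ =>
    ([((0:Int), d_), (d_, (0:Int))]).foldl (fun f xy =>
      if pvTget T xy.1 xy.2 = 0 then f else
      (PySem.List.pyRange 0 (n - 1)).foldl (fun f j =>
        (PySem.List.pyRange 1 ((1:Int) <<< n.toNat)).foldl (fun f mask =>
          if ¬ ((PySem.Str.count (PySem.Int.pyBin mask) "1" : Int) = j + 1) then f else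
          if PySem.Int.band (mask >>> xy.1.toNat) 1 = 0 then f else
          if ¬ (PySem.Int.band (mask >>> xy.2.toNat) 1 = 0) then f else
          let pcnt := dp.getD (mask, xy.1) 0
          if pcnt = 0 then f else
          let scnt := dpsuf.getD (PySem.Int.bxor full mask, xy.2) 0
          if scnt = 0 then f else
          pvAdd2 f d_ j (pcnt * scnt)) f) f) f)
    ((PySem.List.pyRange 0 n).map (fun _ => List.replicate (n - 1).toNat (0:Int)))

-- H = sum(dp.get((full, v), 0) for v in range(n)) (identical Python text in A and B)
def pvH (n : Int) (dp : PySem.Dict (Int × Int) Int) : Int :=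
  ((PySem.List.pyRange 0 n).map (fun v => dp.getD (((1:Int) <<< n.toNat) - 1, v) 0)).sum

def compute_f_dp (T : List (List Int × Int)) (n : Int) : List (List Int) × Int :=
  (aF T n (aDp T n) (aSuf T n), pvH n (aDp T n))

-- ===== PORT B =====
-- B's single DP helper ham_end(edge): forward push over masks ascending, edges via the
-- passed relation (used once for paths-ending-at, once with the reversed relation)
def bHamEnd (n : Int) (edge : Int → Int → Int) : PySem.Dict (Int × Int) Int :=
  (PySem.List.pyRange 1 ((1:Int) <<< n.toNat)).foldl (fun d mask =>
    (PySem.List.pyRange 0 n).foldl (fun d last =>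
      if PySem.Int.band (mask >>> last.toNat) 1 = 0 then d else
      let cnt := d.getD (mask, last) 0
      if cnt = 0 then d else
      (PySem.List.pyRange 0 n).foldl (fun d nxt =>
        if ¬ (PySem.Int.band (mask >>> nxt.toNat) 1 = 0) then d else
        if edge last nxt = 0 then d else
        let nkey := (PySem.Int.bor mask ((1:Int) <<< nxt.toNat), nxt)
        d.insert nkey (d.getD nkey 0 + cnt)) d) d)
    ((PySem.List.pyRange 0 n).foldl
      (fun d v => d.insert (((1:Int) <<< v.toNat), v) 1) PySem.Dict.empty)

-- f stage of B: a single pass over the prefix masks per direction; slot j = bit_count - 1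
def bF (T : List (List Int × Int)) (n : Int)
    (dp dpsuf : PySem.Dict (Int × Int) Int) : List (List Int) :=
  let full := ((1:Int) <<< n.toNat) - 1
  (PySem.List.pyRange 1 n).foldl (fun f d_ =>
    ([((0:Int), d_), (d_, (0:Int))]).foldl (fun f xy =>
      if pvTget T xy.1 xy.2 = 0 then f else
      (PySem.List.pyRange 1 ((1:Int) <<< n.toNat)).foldl (fun f mask =>
        let j := ((PySem.Int.bitCount mask : Nat) : Int) - 1
        if j > n - 2 then f else
        if PySem.Int.band (mask >>> xy.1.toNat) 1 = 0 ∨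
           ¬ (PySem.Int.band (mask >>> xy.2.toNat) 1 = 0) then f else
        pvAdd2 f d_ j
          (dp.getD (mask, xy.1) 0 * dpsuf.getD (PySem.Int.bxor full mask, xy.2) 0)) f) f)
    ((PySem.List.pyRange 0 n).map (fun _ => List.replicate (n - 1).toNat (0:Int)))

def compute_f_dp_alt (T : List (List Int × Int)) (n : Int) : List (List Int) × Int :=
  let dp := bHamEnd n (fun a b => pvTget T a b)
  let dpRev := bHamEnd n (fun a b => pvTget T b a)
  (bF T n dp dpRev, pvH n dp)

-- ===== PRECONDITION & SPEC =====
-- Python A raises ValueError on 1 << n for negative n; that is the only exception.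
def Pre_compute_f_dp (T : List (List Int × Int)) (n : Int) : Prop := 0 ≤ n
instance (T : List (List Int × Int)) (n : Int) : Decidable (Pre_compute_f_dp T n) := by
  unfold Pre_compute_f_dp; infer_instance
def pvWitness_compute_f_dp : (List (List Int × Int)) × Int := ([([0, 1], 1), ([1, 0], 1)], 2)
def Spec_compute_f_dp (T : List (List Int × Int)) (n : Int) (out : List (List Int) × Int) : Prop := out = compute_f_dp_alt T n
instance (T : List (List Int × Int)) (n : Int) (out : List (List Int) × Int) : Decidable (Spec_compute_f_dp T n out) := by unfold Spec_compute_f_dp; infer_instance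

-- ===== CLAIM (what is proved, stated in full; the proofs are below) =====
def Claim_equal_compute_f_dp : Prop := ∀ (T : List (List Int × Int)) (n : Int), Dom_compute_f_dp T n → Pre_compute_f_dp T n → Spec_compute_f_dp T n (compute_f_dp T n)

-- ===== LEMMAS AND PROOFS =====

theorem aF_congr_suf (T : List (List Int × Int)) (n : Int)
    (dp d1 d2 : PySem.Dict (Int × Int) Int)
    (h : ∀ key, d1.getD key 0 = d2.getD key 0) :
    aF T n dp d1 = aF T n dp d2 := by
  unfold aF
  simp only [h]

theorem countGo_one (fuel : Nat) : ∀ (cs : List Char) (acc : Nat), cs.length ≤ fuel →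
    PySem.Chars.count.go ['1'] fuel cs acc = acc + cs.count '1' := by
  induction fuel with
  | zero => intro cs acc h; cases cs with
    | nil => simp [PySem.Chars.count.go]
    | cons c t => simp at h
  | succ f ih =>
    intro cs acc h
    cases cs with
    | nil => simp [PySem.Chars.count.go]
    | cons c t =>
      simp only [PySem.Chars.count.go]
      by_cases hc : c = '1'
      · subst hc
        have : List.isPrefixOf ['1'] ('1' :: t) = true := by simp [List.isPrefixOf]
        rw [if_pos this]
        simp only [List.length, List.drop_succ_cons, List.drop_zero]
        rw [ih t (acc+1) (by simpa using h)]
        simp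
        omega
      · have : List.isPrefixOf ['1'] (c :: t) = false := by
          simp [List.isPrefixOf]; exact fun h' => (hc h'.symm).elim
        rw [if_neg (by simp [this])]
        rw [ih t acc (by simpa using h)]
        simp [hc]

theorem toDigitsCore_count_one : ∀ (f n : Nat) (l : List Char), n < f →
    (Nat.toDigitsCore 2 f n l).count '1' = PySem.Int.bitCount (n : Int) + l.count '1' := by
  intro f
  induction f with
  | zero => omega
  | succ f ih =>
    intro n l h
    simp only [Nat.toDigitsCore]
    by_cases h2 : n / 2 = 0
    · rw [if_pos h2]
      have hn : n = 0 ∨ n = 1 := by omega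
      rcases hn with rfl | rfl
      · simp [Nat.digitChar]
      · have h1 : PySem.Int.bitCount 1 = 1 := by decide
        simp only [Nat.digitChar]
        norm_num [List.count_cons]
        omega

    · rw [if_neg h2]
      rw [ih (n/2) _ (by omega)]
      have hb := PySem.Int.bitCount_natCast (m := n) (by omega)
      rw [hb]
      rcases Nat.mod_two_eq_zero_or_one n with hm | hm <;>
        simp [List.count_cons, hm, Nat.digitChar] <;> omega

theorem count_pyBin_one (m : Int) (hm : 0 ≤ m) :
    (PySem.Str.count (PySem.Int.pyBin m) "1" : Int) = ((PySem.Int.bitCount m : Nat) : Int) := by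
  have hneg : ¬ (m < 0) := by omega
  simp only [PySem.Str.count, PySem.Int.pyBin, PySem.Int.toBinChars0b, if_neg hneg]
  have htl : (String.ofList ('0' :: 'b' :: Nat.toDigits 2 m.toNat)).toList
      = '0' :: 'b' :: Nat.toDigits 2 m.toNat := by simp
  rw [htl]
  have hone : ("1" : String).toList = ['1'] := by decide
  rw [hone]
  have : PySem.Chars.count ('0' :: 'b' :: Nat.toDigits 2 m.toNat) ['1']
      = ('0' :: 'b' :: Nat.toDigits 2 m.toNat).count '1' := by
    simp only [PySem.Chars.count]
    rw [if_neg (by simp)]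
    simpa using countGo_one _ _ 0 le_rfl
  rw [this]
  simp only [List.count_cons]
  rw [Nat.toDigits, toDigitsCore_count_one (m.toNat + 1) m.toNat [] (by omega)]
  have : ((m.toNat : Nat) : Int) = m := Int.toNat_of_nonneg hm
  simp [this]

theorem pvAdd2_zero (f : List (List Int)) (d j : Int) : pvAdd2 f d j 0 = f := by
  unfold pvAdd2
  by_cases hd : d.toNat < f.length
  · by_cases hj : j.toNat < (f.getD d.toNat []).length
    · rw [add_zero, List.getD_eq_getElem _ _ hj, List.set_getElem_self,
        List.getD_eq_getElem _ _ hd, List.set_getElem_self]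
    · rw [List.set_eq_of_length_le (l := f.getD d.toNat []) (by omega),
        List.getD_eq_getElem _ _ hd, List.set_getElem_self]
  · rw [List.set_eq_of_length_le (l := f) (by omega)]

theorem pvAdd2_length (f : List (List Int)) (d j v : Int) : (pvAdd2 f d j v).length = f.length := by
  simp [pvAdd2]

theorem pvAdd2_rowlen (f : List (List Int)) (d j v : Int) (i : Nat) :
    ((pvAdd2 f d j v).getD i []).length = (f.getD i []).length := by
  unfold pvAdd2
  simp only [List.getD_eq_getElem?_getD, List.getElem?_set]
  split_ifs with h1 h2
  · subst h1
    rw [List.getElem?_eq_getElem h2]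
    simp [List.getD_eq_getElem?_getD]
  · subst h1
    rw [List.getElem?_eq_none (by omega)]
  · rfl

theorem pvAdd2_getD (f : List (List Int)) (d j v : Int) (hd : 0 ≤ d) (hj : 0 ≤ j)
    (di ji : Nat) (hdi : di < f.length) (hji : ji < (f.getD di []).length) :
    ((pvAdd2 f d j v).getD di []).getD ji 0
      = (f.getD di []).getD ji 0 + (if d = (di:Int) ∧ j = (ji:Int) then v else 0) := by
  unfold pvAdd2
  by_cases hdd : d = (di:Int)
  · have hD : d.toNat = di := by omega
    subst hD
    rw [List.getD_eq_getElem?_getD (l := f.set _ _), List.getElem?_set, if_pos rfl, if_pos hdi,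
      Option.getD_some]
    by_cases hjj : j = (ji:Int)
    · have hJ : j.toNat = ji := by omega
      subst hJ
      rw [List.getD_eq_getElem?_getD (l := List.set _ _ _), List.getElem?_set, if_pos rfl,
        if_pos (by simpa [List.getD_eq_getElem?_getD] using hji), Option.getD_some]
      rw [if_pos ⟨hdd, hjj⟩, List.getD_eq_getElem?_getD]
    · have hJ : ¬ (j.toNat = ji) := by omega
      rw [List.getD_eq_getElem?_getD (l := List.set _ _ _), List.getElem?_set, if_neg hJ]
      simp [List.getD_eq_getElem?_getD, hjj]
  · have hD : ¬ (d.toNat = di) := by omega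
    rw [List.getD_eq_getElem?_getD (l := f.set _ _), List.getElem?_set, if_neg hD]
    simp [List.getD_eq_getElem?_getD, hdd]

-- histogram lemma
theorem foldl_pvAdd2_getD {α : Type} (l : List α) (dl jl c : α → Int) (f0 : List (List Int))
    (hslot : ∀ m ∈ l, 0 ≤ dl m ∧ 0 ≤ jl m) (di ji : Nat)
    (hdi : di < f0.length) (hji : ji < (f0.getD di []).length) :
    ((l.foldl (fun f m => pvAdd2 f (dl m) (jl m) (c m)) f0).getD di []).getD ji 0
      = (f0.getD di []).getD ji 0
        + (l.map (fun m => if dl m = (di:Int) ∧ jl m = (ji:Int) then c m else 0)).sum := by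
  induction l generalizing f0 with
  | nil => simp
  | cons a t ih =>
    simp only [List.foldl_cons, List.map_cons, List.sum_cons]
    rw [ih _ (fun m hm => hslot m (List.mem_cons_of_mem a hm))
        (by rw [pvAdd2_length]; exact hdi) (by rw [pvAdd2_rowlen]; exact hji)]
    rw [pvAdd2_getD _ _ _ _ (hslot a List.mem_cons_self).1 (hslot a List.mem_cons_self).2
        di ji hdi hji]
    ring

theorem foldl_pvAdd2_len {α : Type} (l : List α) (dl jl c : α → Int) (f0 : List (List Int)) :
    (l.foldl (fun f m => pvAdd2 f (dl m) (jl m) (c m)) f0).length = f0.length := by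
  induction l generalizing f0 with
  | nil => rfl
  | cons a t ih => simp only [List.foldl_cons]; rw [ih, pvAdd2_length]

theorem foldl_pvAdd2_rowlen {α : Type} (l : List α) (dl jl c : α → Int) (f0 : List (List Int))
    (i : Nat) :
    ((l.foldl (fun f m => pvAdd2 f (dl m) (jl m) (c m)) f0).getD i []).length
      = (f0.getD i []).length := by
  induction l generalizing f0 with
  | nil => rfl
  | cons a t ih => simp only [List.foldl_cons]; rw [ih, pvAdd2_rowlen]

theorem bitCount_pos (k : Nat) (hk : 1 ≤ k) : 1 ≤ PySem.Int.bitCount (k : Int) := by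
  induction k using Nat.strong_induction_on with
  | _ k ih =>
    rw [PySem.Int.bitCount_natCast (by omega)]
    rcases Nat.mod_two_eq_zero_or_one k with hm | hm
    · have h2 : 1 ≤ k / 2 := by omega
      have := ih (k / 2) (by omega) h2
      omega
    · omega

theorem bitCount_pos' (m : Int) (hm : 1 ≤ m) : 1 ≤ ((PySem.Int.bitCount m : Nat) : Int) := by
  have h := bitCount_pos m.toNat (by omega)
  have : ((m.toNat : Nat) : Int) = m := Int.toNat_of_nonneg (by omega)
  rw [this] at h
  omega

theorem sum_delta_range (k : Nat) (g : Int → Int) (t : Int) :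
    ((PySem.List.pyRange 0 (k : Int)).map (fun j => if j = t then g j else 0)).sum
      = if 0 ≤ t ∧ t < (k : Int) then g t else 0 := by
  rw [PySem.List.pyRange_zero_natCast]
  induction k with
  | zero => simp
  | succ k ih =>
    rw [List.range_succ]
    simp only [List.map_append, List.map_map, List.sum_append, List.map_cons, List.map_nil,
      List.sum_cons, List.sum_nil]
    simp only [List.map_map] at ih
    rw [ih]
    by_cases hkt : (k : Int) = t
    · rw [if_pos hkt]
      rw [if_neg (by omega), if_pos (by omega)]
      simp [hkt]
    · rw [if_neg hkt]
      by_cases hin : 0 ≤ t ∧ t < (k : Int)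
      · rw [if_pos hin, if_pos (by omega)]
        simp
      · rw [if_neg hin, if_neg (by omega)]
        simp

theorem foldl_nested_flatMap {α β γ : Type} (l1 : List α) (l2 : List β) (g : γ → α → β → γ)
    (init : γ) :
    l1.foldl (fun s x => l2.foldl (fun s y => g s x y) s) init
      = (l1.flatMap (fun x => l2.map (Prod.mk x))).foldl (fun s p => g s p.1 p.2) init := by
  induction l1 generalizing init with
  | nil => rfl
  | cons a t ih =>
    simp only [List.foldl_cons, List.flatMap_cons, List.foldl_append, List.foldl_map]
    rw [ih]

def pvCA (full : Int) (dp dpsuf : PySem.Dict (Int × Int) Int) (x y j mask : Int) : Int :=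
  if ((PySem.Int.bitCount mask : Nat) : Int) = j + 1
     ∧ ¬ (PySem.Int.band (mask >>> (x.toNat : Int)) 1 = 0)
     ∧ (PySem.Int.band (mask >>> (y.toNat : Int)) 1 = 0)
     ∧ ¬ (dp.getD (mask, x) 0 = 0)
     ∧ ¬ (dpsuf.getD (PySem.Int.bxor full mask, y) 0 = 0)
  then dp.getD (mask, x) 0 * dpsuf.getD (PySem.Int.bxor full mask, y) 0
  else 0

def pvCB (n full : Int) (dp dpsuf : PySem.Dict (Int × Int) Int) (x y mask : Int) : Int :=
  if ¬ (((PySem.Int.bitCount mask : Nat) : Int) - 1 > n - 2)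
     ∧ ¬ (PySem.Int.band (mask >>> (x.toNat : Int)) 1 = 0 ∨
          ¬ (PySem.Int.band (mask >>> (y.toNat : Int)) 1 = 0))
  then dp.getD (mask, x) 0 * dpsuf.getD (PySem.Int.bxor full mask, y) 0
  else 0

theorem stepA_eq (full : Int) (dp dpsuf : PySem.Dict (Int × Int) Int) (d_ x y j mask : Int)
    (hm : 0 ≤ mask) (f : List (List Int)) :
    (if ¬ ((PySem.Str.count (PySem.Int.pyBin mask) "1" : Int) = j + 1) then f else
     if PySem.Int.band (mask >>> (x.toNat : Int)) 1 = 0 then f else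
     if ¬ (PySem.Int.band (mask >>> (y.toNat : Int)) 1 = 0) then f else
     if dp.getD (mask, x) 0 = 0 then f else
     if dpsuf.getD (PySem.Int.bxor full mask, y) 0 = 0 then f else
     pvAdd2 f d_ j (dp.getD (mask, x) 0 * dpsuf.getD (PySem.Int.bxor full mask, y) 0))
    = pvAdd2 f d_ j (pvCA full dp dpsuf x y j mask) := by
  rw [count_pyBin_one mask hm]
  unfold pvCA
  split_ifs <;> first | rfl | tauto | (exact (pvAdd2_zero _ _ _).symm)

theorem stepB_eq (n full : Int) (dp dpsuf : PySem.Dict (Int × Int) Int) (d_ x y mask : Int)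
    (f : List (List Int)) :
    (if ((PySem.Int.bitCount mask : Nat) : Int) - 1 > n - 2 then f else
     if PySem.Int.band (mask >>> (x.toNat : Int)) 1 = 0 ∨
        ¬ (PySem.Int.band (mask >>> (y.toNat : Int)) 1 = 0) then f else
     pvAdd2 f d_ (((PySem.Int.bitCount mask : Nat) : Int) - 1)
       (dp.getD (mask, x) 0 * dpsuf.getD (PySem.Int.bxor full mask, y) 0))
    = pvAdd2 f d_ (((PySem.Int.bitCount mask : Nat) : Int) - 1)
        (pvCB n full dp dpsuf x y mask) := by
  unfold pvCB
  split_ifs <;> first | rfl | tauto | (exact (pvAdd2_zero _ _ _).symm)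

theorem sum_map_ite_const {α : Type} (P : Prop) [Decidable P] (g : α → Int) (l : List α) :
    (l.map (fun x => if P then g x else 0)).sum = if P then (l.map g).sum else 0 := by
  split_ifs <;> simp

theorem fkey (n full : Int) (dp dpsuf : PySem.Dict (Int × Int) Int) (d_ x y : Int)
    (h1 : 1 ≤ d_) (h2 : d_ < n) (f0 : List (List Int)) :
    (PySem.List.pyRange 0 (n - 1)).foldl (fun f j =>
      ((PySem.List.pyRange 1 ((1:Int) <<< n.toNat))).foldl (fun f mask =>
        pvAdd2 f d_ j (pvCA full dp dpsuf x y j mask)) f) f0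
    = ((PySem.List.pyRange 1 ((1:Int) <<< n.toNat))).foldl (fun f mask =>
        pvAdd2 f d_ (((PySem.Int.bitCount mask : Nat) : Int) - 1)
          (pvCB n full dp dpsuf x y mask)) f0 := by
  rw [foldl_nested_flatMap (g := fun f j mask => pvAdd2 f d_ j (pvCA full dp dpsuf x y j mask))]
  set LA := (PySem.List.pyRange 0 (n - 1)).flatMap (fun j => ((PySem.List.pyRange 1 ((1:Int) <<< n.toNat))).map (Prod.mk j)) with hLA
  -- side conditions for the histogram lemma
  have hslotA : ∀ p ∈ LA, 0 ≤ (fun p : Int × Int => d_) p ∧ 0 ≤ (Prod.fst : Int × Int → Int) p := by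
    intro p hp
    rw [hLA] at hp
    simp only [List.mem_flatMap, List.mem_map] at hp
    obtain ⟨j, hj, m, _, rfl⟩ := hp
    refine ⟨show (0:Int) ≤ d_ by omega, show (0:Int) ≤ j from (PySem.List.mem_pyRange_one.mp hj).1⟩
  have hslotB : ∀ m ∈ (PySem.List.pyRange 1 ((1:Int) <<< n.toNat)), 0 ≤ d_ ∧ 0 ≤ ((PySem.Int.bitCount m : Nat) : Int) - 1 := by
    intro m hm
    have := (PySem.List.mem_pyRange_one.mp hm).1
    have := bitCount_pos' m (by omega)
    omega
  -- lengths
  have hlenA : (LA.foldl (fun f p => pvAdd2 f d_ p.1 (pvCA full dp dpsuf x y p.1 p.2)) f0).length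
      = f0.length := foldl_pvAdd2_len _ _ _ _ _
  have hlenB : (((PySem.List.pyRange 1 ((1:Int) <<< n.toNat))).foldl (fun f mask => pvAdd2 f d_
        (((PySem.Int.bitCount mask : Nat) : Int) - 1) (pvCB n full dp dpsuf x y mask)) f0).length
      = f0.length := foldl_pvAdd2_len _ _ _ _ _
  apply List.ext_getElem (by rw [hlenA, hlenB])
  intro di hdi1 hdi2
  have hdi : di < f0.length := by rwa [hlenA] at hdi1
  have hrowA : ∀ i : Nat, ((LA.foldl (fun f p => pvAdd2 f d_ p.1 (pvCA full dp dpsuf x y p.1 p.2)) f0).getD i []).length = (f0.getD i []).length := fun i => foldl_pvAdd2_rowlen _ _ _ _ _ i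
  have hrowB : ∀ i : Nat, ((((PySem.List.pyRange 1 ((1:Int) <<< n.toNat))).foldl (fun f mask => pvAdd2 f d_
        (((PySem.Int.bitCount mask : Nat) : Int) - 1) (pvCB n full dp dpsuf x y mask)) f0).getD i []).length = (f0.getD i []).length := fun i => foldl_pvAdd2_rowlen _ _ _ _ _ i
  apply List.ext_getElem (by
    have ha := hrowA di; have hb := hrowB di
    rw [List.getD_eq_getElem _ _ hdi1] at ha
    rw [List.getD_eq_getElem _ _ hdi2] at hb
    rw [ha, hb])
  intro ji hji1 hji2
  have hji : ji < (f0.getD di []).length := by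
    have ha := hrowA di
    rw [List.getD_eq_getElem _ _ hdi1] at ha
    omega
  -- convert entries to getD form
  have eA := foldl_pvAdd2_getD LA (fun _ => d_) Prod.fst
      (fun p => pvCA full dp dpsuf x y p.1 p.2) f0 hslotA di ji hdi hji
  have eB := foldl_pvAdd2_getD ((PySem.List.pyRange 1 ((1:Int) <<< n.toNat))) (fun _ => d_)
      (fun m => ((PySem.Int.bitCount m : Nat) : Int) - 1)
      (fun m => pvCB n full dp dpsuf x y m) f0 hslotB di ji hdi hji
  dsimp only [] at eA eB
  rw [List.getD_eq_getElem _ _ hdi1] at eA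
  rw [List.getD_eq_getElem _ _ hdi2] at eB
  rw [List.getD_eq_getElem _ _ hji1] at eA
  rw [List.getD_eq_getElem _ _ hji2] at eB
  rw [eA, eB]
  congr 1
  -- the two per-slot sums agree
  by_cases hd : d_ = (di : Int)
  · -- same row: compare the bucketed sums
    have hn2 : (2:Int) ≤ n := by omega
    -- A side: flatMap sum → delta over j
    rw [hLA, List.flatMap_def, List.map_flatten, List.map_map, List.sum_flatten, List.map_map]
    have hinner : ∀ j : Int,
        (List.sum ∘ (List.map (fun p : Int × Int => if d_ = (di:Int) ∧ p.1 = (ji:Int)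
              then pvCA full dp dpsuf x y p.1 p.2 else 0))
            ∘ (fun j : Int => List.map (Prod.mk j) ((PySem.List.pyRange 1 ((1:Int) <<< n.toNat))))) j
        = if j = (ji:Int)
            then (((PySem.List.pyRange 1 ((1:Int) <<< n.toNat))).map (fun m => pvCA full dp dpsuf x y j m)).sum else 0 := by
      intro j
      simp only [Function.comp_apply, List.map_map]
      rw [show ((fun p : Int × Int => if d_ = (di:Int) ∧ p.1 = (ji:Int)
              then pvCA full dp dpsuf x y p.1 p.2 else 0) ∘ Prod.mk j)
          = (fun m => if j = (ji:Int) then pvCA full dp dpsuf x y j m else 0) from by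
        funext m
        simp only [Function.comp_apply]
        exact if_congr (and_iff_right hd) rfl rfl]
      exact sum_map_ite_const _ _ _
    rw [List.map_congr_left (fun j _ => hinner j)]
    rw [show n - 1 = (((n - 1).toNat : Nat) : Int) from by omega]
    rw [sum_delta_range ((n - 1).toNat) (fun j => (((PySem.List.pyRange 1 ((1:Int) <<< n.toNat))).map
        (fun m => pvCA full dp dpsuf x y j m)).sum) (ji : Int)]
    -- B side: reduce the condition using hd
    rw [List.map_congr_left (fun (m : Int) (_ : m ∈ (PySem.List.pyRange 1 ((1:Int) <<< n.toNat))) => show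
        (if d_ = (di:Int) ∧ ((PySem.Int.bitCount m : Nat) : Int) - 1 = (ji:Int)
         then pvCB n full dp dpsuf x y m else 0)
        = (if ((PySem.Int.bitCount m : Nat) : Int) - 1 = (ji:Int)
           then pvCB n full dp dpsuf x y m else 0) from
      if_congr (and_iff_right hd) rfl rfl)]
    by_cases hr : (ji : Int) < n - 1
    · rw [if_pos (show (0:Int) ≤ (ji:Int) ∧ (ji:Int) < (((n - 1).toNat : Nat) : Int) from ⟨by omega, by omega⟩)]
      refine congrArg List.sum (List.map_congr_left ?_)
      intro m hm
      have hm1 : (1:Int) ≤ m := (PySem.List.mem_pyRange_one.mp hm).1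
      by_cases hbc : ((PySem.Int.bitCount m : Nat) : Int) = (ji:Int) + 1
      · rw [if_pos (show ((PySem.Int.bitCount m : Nat) : Int) - 1 = (ji:Int) by omega)]
        unfold pvCA pvCB
        by_cases hbx : PySem.Int.band (m >>> (x.toNat : Int)) 1 = 0
        · rw [if_neg (fun hc => hc.2.1 hbx), if_neg (fun hc => hc.2 (Or.inl hbx))]
        · by_cases hby : PySem.Int.band (m >>> (y.toNat : Int)) 1 = 0
          · by_cases hpz : dp.getD (m, x) 0 = 0 ∨ dpsuf.getD (PySem.Int.bxor full m, y) 0 = 0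
            · rw [if_neg (fun hc => hpz.elim (fun h => hc.2.2.2.1 h) (fun h => hc.2.2.2.2 h)),
                if_pos (show ¬(((PySem.Int.bitCount m : Nat) : Int) - 1 > n - 2) ∧
                    ¬(PySem.Int.band (m >>> (x.toNat : Int)) 1 = 0 ∨
                      ¬ (PySem.Int.band (m >>> (y.toNat : Int)) 1 = 0)) from
                  ⟨by omega, fun hc => hc.elim hbx (fun h2 => h2 hby)⟩)]
              rcases hpz with h | h <;> rw [h] <;> simp
            · push_neg at hpz
              rw [if_pos ⟨hbc, hbx, hby, hpz.1, hpz.2⟩,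
                if_pos (show ¬(((PySem.Int.bitCount m : Nat) : Int) - 1 > n - 2) ∧
                    ¬(PySem.Int.band (m >>> (x.toNat : Int)) 1 = 0 ∨
                      ¬ (PySem.Int.band (m >>> (y.toNat : Int)) 1 = 0)) from
                  ⟨by omega, fun hc => hc.elim hbx (fun h2 => h2 hby)⟩)]
          · rw [if_neg (fun hc => hby hc.2.2.1), if_neg (fun hc => hc.2 (Or.inr hby))]
      · rw [if_neg (show ¬(((PySem.Int.bitCount m : Nat) : Int) - 1 = (ji:Int)) by omega)]
        exact if_neg (fun hc => hbc hc.1)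
    · rw [if_neg (by omega)]
      symm
      rw [List.map_congr_left (fun (m : Int) (hm : m ∈ (PySem.List.pyRange 1 ((1:Int) <<< n.toNat))) => show
          (if ((PySem.Int.bitCount m : Nat) : Int) - 1 = (ji:Int)
           then pvCB n full dp dpsuf x y m else 0) = 0 from by
        by_cases hbc : ((PySem.Int.bitCount m : Nat) : Int) - 1 = (ji:Int)
        · rw [if_pos hbc]
          unfold pvCB
          rw [if_neg (fun hc => hc.1 (by omega))]
        · rw [if_neg hbc])]
      simp
  · -- different row: both sums vanish
    rw [List.map_congr_left (fun (p : Int × Int) (_ : p ∈ LA) => show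
          (if d_ = (di:Int) ∧ p.1 = (ji:Int)
           then pvCA full dp dpsuf x y p.1 p.2 else 0) = 0 from
          if_neg (fun hc => hd hc.1)),
        List.map_congr_left (fun (m : Int) (_ : m ∈ (PySem.List.pyRange 1 ((1:Int) <<< n.toNat))) => show
          (if d_ = (di:Int) ∧ ((PySem.Int.bitCount m : Nat) : Int) - 1 = (ji:Int)
           then pvCB n full dp dpsuf x y m else 0) = 0 from
          if_neg (fun hc => hd hc.1))]
    simp

theorem bF_eq_aF (T : List (List Int × Int)) (n : Int) (dp dpsuf : PySem.Dict (Int × Int) Int) :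
    bF T n dp dpsuf = aF T n dp dpsuf := by
  unfold aF bF
  dsimp only []
  symm
  apply PySem.List.foldl_congr_mem
  intro f d_ hd_
  obtain ⟨hd1, hd2⟩ := PySem.List.mem_pyRange_one.mp hd_
  apply PySem.List.foldl_congr_mem
  intro f2 xy _
  by_cases hedge : pvTget T xy.1 xy.2 = 0
  · rw [if_pos hedge, if_pos hedge]
  · rw [if_neg hedge, if_neg hedge]
    have hA : (PySem.List.pyRange 0 (n - 1)).foldl (fun f j =>
        (PySem.List.pyRange 1 ((1:Int) <<< n.toNat)).foldl (fun f mask =>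
          if ¬ ((PySem.Str.count (PySem.Int.pyBin mask) "1" : Int) = j + 1) then f else
          if PySem.Int.band (mask >>> (xy.1.toNat : Int)) 1 = 0 then f else
          if ¬ (PySem.Int.band (mask >>> (xy.2.toNat : Int)) 1 = 0) then f else
          if dp.getD (mask, xy.1) 0 = 0 then f else
          if dpsuf.getD (PySem.Int.bxor (((1:Int) <<< n.toNat) - 1) mask, xy.2) 0 = 0 then f else
          pvAdd2 f d_ j (dp.getD (mask, xy.1) 0 *
            dpsuf.getD (PySem.Int.bxor (((1:Int) <<< n.toNat) - 1) mask, xy.2) 0)) f) f2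
        = (PySem.List.pyRange 0 (n - 1)).foldl (fun f j =>
        (PySem.List.pyRange 1 ((1:Int) <<< n.toNat)).foldl (fun f mask =>
          pvAdd2 f d_ j (pvCA (((1:Int) <<< n.toNat) - 1) dp dpsuf xy.1 xy.2 j mask)) f) f2 := by
      apply PySem.List.foldl_congr_mem
      intro acc j _
      apply PySem.List.foldl_congr_mem
      intro acc2 mask hmask
      exact stepA_eq (((1:Int) <<< n.toNat) - 1) dp dpsuf d_ xy.1 xy.2 j mask
        (by have := (PySem.List.mem_pyRange_one.mp hmask).1; omega) acc2
    have hB : (PySem.List.pyRange 1 ((1:Int) <<< n.toNat)).foldl (fun f mask =>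
        if ((PySem.Int.bitCount mask : Nat) : Int) - 1 > n - 2 then f else
        if PySem.Int.band (mask >>> (xy.1.toNat : Int)) 1 = 0 ∨
           ¬ (PySem.Int.band (mask >>> (xy.2.toNat : Int)) 1 = 0) then f else
        pvAdd2 f d_ (((PySem.Int.bitCount mask : Nat) : Int) - 1) (dp.getD (mask, xy.1) 0 *
          dpsuf.getD (PySem.Int.bxor (((1:Int) <<< n.toNat) - 1) mask, xy.2) 0)) f2
        = (PySem.List.pyRange 1 ((1:Int) <<< n.toNat)).foldl (fun f mask =>
          pvAdd2 f d_ (((PySem.Int.bitCount mask : Nat) : Int) - 1)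
            (pvCB n (((1:Int) <<< n.toNat) - 1) dp dpsuf xy.1 xy.2 mask)) f2 := by
      apply PySem.List.foldl_congr_mem
      intro acc mask _
      exact stepB_eq n (((1:Int) <<< n.toNat) - 1) dp dpsuf d_ xy.1 xy.2 mask acc
    rw [hA, hB]
    exact fkey n (((1:Int) <<< n.toNat) - 1) dp dpsuf d_ xy.1 xy.2 hd1 hd2 f2


theorem pv_testBit_sub (m l : Nat) (h : m.testBit l = true) (i : Nat) :
    (m - 2 ^ l).testBit i = (m.testBit i && !(decide (i = l))) := by
  have hbit : m / 2 ^ l % 2 = 1 := by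
    have h2 := Nat.testBit_eq_decide_div_mod_eq (x := m) (i := l)
    rw [h] at h2
    exact of_decide_eq_true h2.symm
  have hr2 : m % 2 ^ l < 2 ^ l := Nat.mod_lt _ (Nat.two_pow_pos l)
  have hps : (2:Nat) ^ (l+1) = 2 ^ l * 2 := by ring
  have hmm : m % 2 ^ (l+1) = m % 2 ^ l + 2 ^ l := by
    rw [hps, Nat.mod_mul, hbit]; ring
  have hd := Nat.div_add_mod m (2 ^ (l+1))
  have hm1 : m = 2 ^ (l+1) * (m / 2 ^ (l+1)) + (2 ^ l + m % 2 ^ l) := by omega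
  have hsub : m - 2 ^ l = 2 ^ (l+1) * (m / 2 ^ (l+1)) + m % 2 ^ l := by omega
  rw [hsub, Nat.testBit_two_pow_mul_add _ (by omega) i]
  conv_rhs => rw [hm1, Nat.testBit_two_pow_mul_add _ (by omega) i]
  by_cases h1 : i < l + 1
  · rw [if_pos h1, if_pos h1]
    by_cases h2 : i = l
    · subst h2
      rw [Nat.testBit_lt_two_pow hr2]
      simp
    · have h3 : i < l := by omega
      have : (2:Nat) ^ l + m % 2 ^ l = 2 ^ l * 1 + m % 2 ^ l := by ring
      rw [this, Nat.testBit_two_pow_mul_add _ hr2 i, if_pos h3]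
      simp [h2]
  · rw [if_neg h1, if_neg h1]
    have h2 : ¬ (i = l) := by omega
    simp [h2]

theorem pv_testBit_add (p l : Nat) (h : p.testBit l = false) (i : Nat) :
    (p + 2 ^ l).testBit i = (p.testBit i || decide (i = l)) := by
  have hbit : p / 2 ^ l % 2 = 0 := by
    have h2 := Nat.testBit_eq_decide_div_mod_eq (x := p) (i := l)
    rw [h] at h2
    have := of_decide_eq_false h2.symm
    omega
  have hr2 : p % 2 ^ l < 2 ^ l := Nat.mod_lt _ (Nat.two_pow_pos l)
  have hps : (2:Nat) ^ (l+1) = 2 ^ l * 2 := by ring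
  have hmm : p % 2 ^ (l+1) = p % 2 ^ l := by
    rw [hps, Nat.mod_mul, hbit]; ring
  have hd := Nat.div_add_mod p (2 ^ (l+1))
  have hm1 : p = 2 ^ (l+1) * (p / 2 ^ (l+1)) + p % 2 ^ l := by omega
  have hadd : p + 2 ^ l = 2 ^ (l+1) * (p / 2 ^ (l+1)) + (2 ^ l + p % 2 ^ l) := by omega
  rw [hadd, Nat.testBit_two_pow_mul_add _ (by omega) i]
  conv_rhs => rw [hm1, Nat.testBit_two_pow_mul_add _ (by omega) i]
  by_cases h1 : i < l + 1
  · rw [if_pos h1, if_pos h1]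
    by_cases h2 : i = l
    · subst h2
      rw [Nat.testBit_lt_two_pow hr2]
      have : (2:Nat) ^ i + p % 2 ^ i = 2 ^ i * 1 + p % 2 ^ i := by ring
      rw [this, Nat.testBit_mul_two_pow_add_eq, Nat.testBit_lt_two_pow hr2]
      simp
    · have h3 : i < l := by omega
      have : (2:Nat) ^ l + p % 2 ^ l = 2 ^ l * 1 + p % 2 ^ l := by ring
      rw [this, Nat.testBit_two_pow_mul_add _ hr2 i, if_pos h3]
      simp [h2]
  · rw [if_neg h1, if_neg h1]
    have h2 : ¬ (i = l) := by omega
    simp [h2]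

theorem pv_or_eq_add (p l : Nat) (h : p.testBit l = false) : p ||| 2 ^ l = p + 2 ^ l := by
  apply Nat.eq_of_testBit_eq
  intro i
  rw [Nat.testBit_or, pv_testBit_add p l h i, Nat.testBit_two_pow]
  by_cases h2 : i = l
  · subst h2; simp [h]
  · have h3 : ¬ (l = i) := fun hh => h2 hh.symm
    simp [h2, h3]

theorem pv_bitguard (M : Nat) (l : Nat) :
    PySem.Int.band ((M : Int) >>> l) 1 = 0 ↔ M.testBit l = false := by
  rw [← Int.natCast_shiftRight]
  have h1 : (1 : Int) = ((1 : Nat) : Int) := rfl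
  rw [h1, PySem.Int.band_natCast, Nat.and_one_is_mod, Nat.shiftRight_eq_div_pow]
  rw [Nat.testBit_eq_decide_div_mod_eq]
  constructor
  · intro h
    have : M / 2 ^ l % 2 = 0 := by exact_mod_cast h
    simp [this]
  · intro h
    have := of_decide_eq_false h
    have h2 : M / 2 ^ l % 2 = 0 := by omega
    exact_mod_cast congrArg (Nat.cast : Nat → Int) h2

theorem pv_bandnot (M K : Nat) :
    PySem.Int.band (M : Int) (Int.not (K : Int)) = ((M - (M &&& K) : Nat) : Int) := by
  have hnot : Int.not (K : Int) = -(K : Int) - 1 := by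
    simp [Int.not, Int.negSucc_eq]
    ring
  rw [hnot]
  unfold PySem.Int.band
  rw [if_pos (by positivity), if_neg (by omega)]
  congr 1
  have h1 : (-(-(K:Int) - 1) - 1).toNat = K := by omega
  rw [h1, Int.toNat_natCast]

theorem pv_clearbit (M l : Nat) (h : M.testBit l = true) :
    PySem.Int.band (M : Int) (Int.not ((1:Int) <<< l)) = ((M - 2 ^ l : Nat) : Int) := by
  have h1 : ((1:Int) <<< l) = ((2 ^ l : Nat) : Int) := by
    rw [show (1:Int) = ((1:Nat) : Int) from rfl, ← Int.natCast_shiftLeft, Nat.one_shiftLeft]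
  rw [h1, pv_bandnot, Nat.and_two_pow, h]
  simp

theorem pv_setbit (M l : Nat) :
    PySem.Int.bor (M : Int) ((1:Int) <<< l) = ((M ||| 2 ^ l : Nat) : Int) := by
  have h1 : ((1:Int) <<< l) = ((2 ^ l : Nat) : Int) := by
    rw [show (1:Int) = ((1:Nat) : Int) from rfl, ← Int.natCast_shiftLeft, Nat.one_shiftLeft]
  rw [h1, PySem.Int.bor_natCast]

theorem pv_bc_le (nn M : Nat) (h : M < 2 ^ nn) : PySem.Int.bitCount (M : Int) ≤ nn := by
  induction nn generalizing M with
  | zero =>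
    have : M = 0 := by simpa using h
    simp [this]
  | succ nn ih =>
    by_cases h0 : M = 0
    · simp [h0]
    · rw [PySem.Int.bitCount_natCast (by omega)]
      have hps : (2:Nat) ^ (nn+1) = 2 ^ nn * 2 := by ring
      have := ih (M / 2) (by omega)
      omega

theorem pv_bc_sub (M l : Nat) (h : M.testBit l = true) :
    PySem.Int.bitCount ((M - 2 ^ l : Nat) : Int) + 1 = PySem.Int.bitCount (M : Int) := by
  induction l generalizing M with
  | zero =>
    have hodd : M % 2 = 1 := by
      have h2 := Nat.testBit_eq_decide_div_mod_eq (x := M) (i := 0)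
      rw [h] at h2
      have := of_decide_eq_true h2.symm
      simpa using this
    have hM := Nat.ge_two_pow_of_testBit h
    rw [PySem.Int.bitCount_natCast (m := M) (by omega)]
    by_cases h1 : M = 1
    · subst h1; decide
    · have hpos2 : 0 < M - 2 ^ 0 := by omega
      rw [PySem.Int.bitCount_natCast hpos2]
      have e1 : (M - 2 ^ 0) % 2 = 0 := by omega
      have e2 : (M - 2 ^ 0) / 2 = M / 2 := by omega
      rw [e1, e2, hodd]
      omega
  | succ l ih =>
    have hbit : (M / 2).testBit l = true := by
      rw [← Nat.testBit_add_one]; exact h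
    have hM : 2 ^ (l+1) ≤ M := Nat.ge_two_pow_of_testBit h
    have hps : (2:Nat) ^ (l+1) = 2 ^ l * 2 := by ring
    have hMpos : 0 < M := by have := Nat.two_pow_pos (l+1); omega
    rw [PySem.Int.bitCount_natCast (m := M) hMpos]
    by_cases h0 : M - 2 ^ (l+1) = 0
    · rw [h0]
      have hM2 : M = 2 ^ (l+1) := by omega
      have := ih (M / 2) hbit
      have hd : M / 2 - 2 ^ l = 0 := by omega
      rw [hd] at this
      have hme : M % 2 = 0 := by omega
      rw [show ((0:Nat):Int) = 0 from by norm_num] at this ⊢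
      rw [PySem.Int.bitCount_zero] at this ⊢
      omega
    · have hpos : 0 < M - 2 ^ (l+1) := by omega
      rw [PySem.Int.bitCount_natCast hpos]
      have e1 : (M - 2 ^ (l+1)) % 2 = M % 2 := by omega
      have e2 : (M - 2 ^ (l+1)) / 2 = M / 2 - 2 ^ l := by omega
      rw [e1, e2]
      have := ih (M / 2) hbit
      omega

theorem pv_bc_zero (M : Nat) : PySem.Int.bitCount (M : Int) = 0 ↔ M = 0 := by
  induction M using Nat.strong_induction_on with
  | _ M ih =>
    by_cases h0 : M = 0
    · simp [h0]
    · rw [PySem.Int.bitCount_natCast (by omega)]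
      constructor
      · intro h
        have h1 : PySem.Int.bitCount ((M / 2 : Nat) : Int) = 0 := by omega
        have h2 : M % 2 = 0 := by omega
        have := (ih (M / 2) (by omega)).mp h1
        omega
      · intro h; omega

theorem pv_bc_one (M l : Nat) (h : M.testBit l = true) :
    PySem.Int.bitCount (M : Int) = 1 ↔ M = 2 ^ l := by
  have hge := Nat.ge_two_pow_of_testBit h
  constructor
  · intro h1
    have := pv_bc_sub M l h
    have h2 : PySem.Int.bitCount ((M - 2 ^ l : Nat) : Int) = 0 := by omega
    have := (pv_bc_zero _).mp h2
    omega
  · intro h1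
    subst h1
    have := pv_bc_sub (2 ^ l) l h
    have h2 : (2:Nat) ^ l - 2 ^ l = 0 := by omega
    rw [h2] at this
    simpa using this.symm

def pvSpec (g : Int → Int → Int) (nn : Nat) (mask : Nat) (l : Nat) : Int :=
  if h : mask.testBit l ∧ l < nn then
    if mask = 2 ^ l then 1
    else ((List.range nn).map (fun prev =>
      if (mask - 2 ^ l).testBit prev ∧ ¬ g (l : Int) (prev : Int) = 0 then
        pvSpec g nn (mask - 2 ^ l) prev
      else 0)).sum
  else 0
termination_by mask
decreasing_by
  have h1 := Nat.ge_two_pow_of_testBit h.1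
  have h2 := Nat.two_pow_pos l
  omega

theorem pvSpec_of_not_bit (g : Int → Int → Int) (nn : Nat) (mask l : Nat)
    (h : ¬ (mask.testBit l = true ∧ l < nn)) : pvSpec g nn mask l = 0 := by
  rw [pvSpec, dif_neg h]

theorem pvSpec_singleton (g : Int → Int → Int) (nn : Nat) (l : Nat) (h : l < nn) :
    pvSpec g nn (2 ^ l) l = 1 := by
  rw [pvSpec, dif_pos ⟨Nat.testBit_two_pow_self, h⟩, if_pos rfl]

theorem pvSpec_eq_sum (g : Int → Int → Int) (nn : Nat) (mask l : Nat)
    (hb : mask.testBit l = true) (hl : l < nn) (hs : ¬ mask = 2 ^ l) :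
    pvSpec g nn mask l = ((List.range nn).map (fun prev =>
      if (mask - 2 ^ l).testBit prev ∧ ¬ g (l : Int) (prev : Int) = 0 then
        pvSpec g nn (mask - 2 ^ l) prev
      else 0)).sum := by
  rw [pvSpec, dif_pos ⟨hb, hl⟩, if_neg hs]

theorem pvSpec_nonneg (g : Int → Int → Int) (nn : Nat) (mask l : Nat) :
    0 ≤ pvSpec g nn mask l := by
  induction mask using Nat.strong_induction_on generalizing l with
  | _ mask ih =>
    rw [pvSpec]
    split
    · rename_i h
      split
      · omega
      · apply List.sum_nonneg
        intro x hx
        simp only [List.mem_map, List.mem_range] at hx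
        obtain ⟨prev, hprev, rfl⟩ := hx
        split
        · exact ih (mask - 2 ^ l)
            (by have := Nat.ge_two_pow_of_testBit h.1; have := Nat.two_pow_pos l; omega) prev
        · omega
    · omega

theorem pvSpec_high (g : Int → Int → Int) (nn : Nat) (mask l : Nat) (h : 2 ^ nn ≤ mask) :
    pvSpec g nn mask l = 0 := by
  induction mask using Nat.strong_induction_on generalizing l with
  | _ mask ih =>
    rw [pvSpec]
    split
    · rename_i hg
      rw [if_neg (by
        intro he
        have : (2:Nat) ^ l < 2 ^ nn := Nat.pow_lt_pow_right (by omega) hg.2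
        omega)]
      apply List.sum_eq_zero
      intro x hx
      simp only [List.mem_map, List.mem_range] at hx
      obtain ⟨prev, hprev, rfl⟩ := hx
      split
      · have hlt : mask - 2 ^ l < mask := by
          have := Nat.ge_two_pow_of_testBit hg.1
          have := Nat.two_pow_pos l
          omega
        apply ih (mask - 2 ^ l) hlt
        obtain ⟨b, hbn, hbt⟩ := Nat.exists_ge_and_testBit_of_ge_two_pow h
        have hbl : ¬ (b = l) := by omega
        have : (mask - 2 ^ l).testBit b = true := by
          rw [pv_testBit_sub mask l hg.1 b, hbt]
          simp [hbl]
        calc 2 ^ nn ≤ 2 ^ b := Nat.pow_le_pow_right (by omega) hbn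
          _ ≤ mask - 2 ^ l := Nat.ge_two_pow_of_testBit this
      · rfl
    · rfl

-- generic: the init loop "for v in range(n): dp[(1 << v, v)] = 1"
theorem pv_init_aux (key : Int × Int) : ∀ (L : List Int) (d : PySem.Dict (Int × Int) Int),
    (L.foldl (fun d v => d.insert (((1:Int) <<< v.toNat), v) 1) d).getD key 0
    = if ∃ v ∈ L, key = (((1:Int) <<< v.toNat), v) then 1 else d.getD key 0 := by
  intro L
  induction L with
  | nil => simp
  | cons a t ih =>
    intro d
    simp only [List.foldl_cons]
    rw [ih]
    by_cases h1 : ∃ v ∈ t, key = (((1:Int) <<< v.toNat), v)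
    · rw [if_pos h1, if_pos (by obtain ⟨v, hv, hk⟩ := h1; exact ⟨v, List.mem_cons_of_mem a hv, hk⟩)]
    · rw [if_neg h1, PySem.Dict.getD_insert]
      by_cases h2 : key = (((1:Int) <<< a.toNat), a)
      · rw [if_pos h2, if_pos ⟨a, List.mem_cons_self, h2⟩]
      · rw [if_neg h2, if_neg (by
          rintro ⟨v, hv, hk⟩
          rcases List.mem_cons.mp hv with rfl | hv'
          · exact h2 hk
          · exact h1 ⟨v, hv', hk⟩)]

theorem pv_filter_single (c : Int) (Q : Int → Prop) [DecidablePred Q] :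
    ∀ (L : List Int), L.Nodup →
    ((L.filter (fun x => decide (x = c ∧ Q x))).length : Int)
      = if c ∈ L ∧ Q c then 1 else 0 := by
  intro L
  induction L with
  | nil => simp
  | cons a t ih =>
    intro hnd
    rw [List.filter_cons]
    have hnd' := hnd.of_cons
    by_cases ha : a = c ∧ Q a
    · obtain ⟨rfl, hq⟩ := ha
      rw [if_pos (by simp [hq])]
      have hnotin : a ∉ t := (List.nodup_cons.mp hnd).1
      simp only [List.length_cons]
      rw [if_pos ⟨List.mem_cons_self, hq⟩]
      have : ¬ (a ∈ t ∧ Q a) := fun h => hnotin h.1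
      have hih := ih hnd'
      rw [if_neg this] at hih
      push_cast at hih ⊢
      omega
    · rw [if_neg (by simpa using ha)]
      rw [ih hnd']
      by_cases hc : a = c
      · subst hc
        have hq : ¬ Q a := fun h => ha ⟨rfl, h⟩
        rw [if_neg (fun h => hq h.2), if_neg (fun h => hq h.2)]
      · have : (c ∈ a :: t ∧ Q c) ↔ (c ∈ t ∧ Q c) := by
          constructor
          · rintro ⟨hm, hq⟩
            rcases List.mem_cons.mp hm with rfl | hm'
            · exact absurd rfl hc
            · exact ⟨hm', hq⟩
          · rintro ⟨hm, hq⟩; exact ⟨List.mem_cons_of_mem a hm, hq⟩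
        rw [if_congr this rfl rfl]

-- innermost nxt-loop of the push DP, over an arbitrary list of candidates
theorem pv_push_inner (e : Int → Int → Int) (mask : Int) (last cnt : Int)
    (body : PySem.Dict (Int × Int) Int → Int → PySem.Dict (Int × Int) Int)
    (hbody : ∀ d nxt, body d nxt =
      if ¬ (PySem.Int.band (mask >>> nxt.toNat) 1 = 0) then d else
      if e last nxt = 0 then d else
      d.insert (PySem.Int.bor mask ((1:Int) <<< nxt.toNat), nxt)
        (d.getD (PySem.Int.bor mask ((1:Int) <<< nxt.toNat), nxt) 0 + cnt)) :
    ∀ (L : List Int) (d : PySem.Dict (Int × Int) Int) (key : Int × Int),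
    (L.foldl body d).getD key 0
    = d.getD key 0
      + ((L.filter (fun nxt => decide (nxt = key.2 ∧ PySem.Int.band (mask >>> nxt.toNat) 1 = 0
            ∧ ¬ e last nxt = 0
            ∧ key.1 = PySem.Int.bor mask ((1:Int) <<< nxt.toNat)))).length : Int) * cnt := by
  intro L
  induction L with
  | nil => simp
  | cons a t ih =>
    intro d key
    simp only [List.foldl_cons, List.filter_cons]
    rw [hbody d a]
    by_cases h1 : PySem.Int.band (mask >>> a.toNat) 1 = 0
    · by_cases h2 : e last a = 0
      · rw [if_neg (not_not_intro h1), if_pos h2,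
          if_neg (by simp only [decide_eq_true_eq]; rintro ⟨_, _, hne, _⟩; exact hne h2)]
        exact ih d key
      · rw [if_neg (not_not_intro h1), if_neg h2, ih]
        rw [PySem.Dict.getD_insert]
        by_cases h3 : key = (PySem.Int.bor mask ((1:Int) <<< a.toNat), a)
        · rw [if_pos h3, if_pos (by
            simp only [decide_eq_true_eq]
            exact ⟨by rw [h3], h1, h2, by rw [h3]⟩)]
          rw [← h3]
          simp only [List.length_cons]
          push_cast
          ring
        · rw [if_neg h3, if_neg (by
            simp only [decide_eq_true_eq]
            rintro ⟨ha, _, _, hk⟩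
            exact h3 (Prod.ext_iff.mpr ⟨hk, ha.symm⟩))]
    · rw [if_pos h1,
        if_neg (by simp only [decide_eq_true_eq]; rintro ⟨_, hb, _⟩; exact h1 hb)]
      exact ih d key

theorem pv_one_shift (l : Nat) : ((1:Int) <<< l) = ((2 ^ l : Nat) : Int) := by
  rw [show (1:Int) = ((1:Nat) : Int) from rfl, ← Int.natCast_shiftLeft, Nat.one_shiftLeft]

def pvPushG (e : Int → Int → Int) (n : Int) (M : Nat) (key : Int × Int) : Int :=
  if 0 < key.1 ∧ 0 ≤ key.2 ∧ key.2 < n ∧ key.1.toNat.testBit key.2.toNat ∧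
     key.1.toNat - 2 ^ key.2.toNat ≤ M
  then pvSpec (fun l prev => e prev l) n.toNat key.1.toNat key.2.toNat else 0

def pvContrib (e : Int → Int → Int) (n : Int) (nn M : Nat) (last : Int) (key : Int × Int) : Int :=
  if M.testBit last.toNat = true ∧ 0 ≤ last ∧ last < n
     ∧ 0 ≤ key.2 ∧ key.2 < n ∧ M.testBit key.2.toNat = false ∧ ¬ e last key.2 = 0
     ∧ key.1 = ((M + 2 ^ key.2.toNat : Nat) : Int)
  then pvSpec (fun l prev => e prev l) nn M last.toNat else 0

theorem pv_push_inner_range (e : Int → Int → Int) (n : Int) (M : Nat) (mask : Int)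
    (hmask : mask = (M : Int)) (last cnt : Int)
    (body : PySem.Dict (Int × Int) Int → Int → PySem.Dict (Int × Int) Int)
    (hbody : ∀ d nxt, body d nxt =
      if ¬ (PySem.Int.band (mask >>> nxt.toNat) 1 = 0) then d else
      if e last nxt = 0 then d else
      d.insert (PySem.Int.bor mask ((1:Int) <<< nxt.toNat), nxt)
        (d.getD (PySem.Int.bor mask ((1:Int) <<< nxt.toNat), nxt) 0 + cnt))
    (d : PySem.Dict (Int × Int) Int) (key : Int × Int) :
    ((PySem.List.pyRange 0 n).foldl body d).getD key 0
    = d.getD key 0 + (if 0 ≤ key.2 ∧ key.2 < n ∧ M.testBit key.2.toNat = false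
        ∧ ¬ e last key.2 = 0 ∧ key.1 = ((M + 2 ^ key.2.toNat : Nat) : Int) then cnt else 0) := by
  rw [pv_push_inner e mask last cnt body hbody (PySem.List.pyRange 0 n) d key]
  congr 1
  rw [pv_filter_single key.2
      (fun nxt => PySem.Int.band (mask >>> nxt.toNat) 1 = 0 ∧ ¬ e last nxt = 0
        ∧ key.1 = PySem.Int.bor mask ((1:Int) <<< nxt.toNat))
      (PySem.List.pyRange 0 n) (PySem.List.nodup_pyRange_one 0 n)]
  by_cases hc : 0 ≤ key.2 ∧ key.2 < n ∧ M.testBit key.2.toNat = false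
      ∧ ¬ e last key.2 = 0 ∧ key.1 = ((M + 2 ^ key.2.toNat : Nat) : Int)
  · obtain ⟨h0, h1, h2, h3, h4⟩ := hc
    rw [if_pos ⟨PySem.List.mem_pyRange_one.mpr ⟨h0, h1⟩, by
        refine ⟨?_, h3, ?_⟩
        · rw [hmask, show key.2.toNat = ((key.2.toNat : Nat)) from rfl]
          have : key.2 = ((key.2.toNat : Nat) : Int) := by omega
          rw [pv_bitguard]
          exact h2
        · rw [hmask, pv_setbit, pv_or_eq_add _ _ h2, h4]⟩,
      if_pos ⟨h0, h1, h2, h3, h4⟩]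
    ring
  · rw [if_neg hc, if_neg (by
      rintro ⟨hmem, hb, he, hk⟩
      obtain ⟨h0, h1⟩ := PySem.List.mem_pyRange_one.mp hmem
      rw [hmask] at hb hk
      rw [pv_bitguard] at hb
      rw [pv_setbit, pv_or_eq_add _ _ hb] at hk
      exact hc ⟨h0, h1, hb, he, hk⟩)]
    simp

theorem pv_push_lasts (e : Int → Int → Int) (n : Int) (nn M : Nat) (mask : Int)
    (hmask : mask = (M : Int))
    (ibody : Int → Int → PySem.Dict (Int × Int) Int → Int → PySem.Dict (Int × Int) Int)
    (hib : ∀ last cnt d nxt, ibody last cnt d nxt =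
      if ¬ (PySem.Int.band (mask >>> nxt.toNat) 1 = 0) then d else
      if e last nxt = 0 then d else
      d.insert (PySem.Int.bor mask ((1:Int) <<< nxt.toNat), nxt)
        (d.getD (PySem.Int.bor mask ((1:Int) <<< nxt.toNat), nxt) 0 + cnt))
    (lbody : PySem.Dict (Int × Int) Int → Int → PySem.Dict (Int × Int) Int)
    (hlb : ∀ d last, lbody d last =
      if PySem.Int.band (mask >>> last.toNat) 1 = 0 then d else
      if d.getD (mask, last) 0 = 0 then d else
      (PySem.List.pyRange 0 n).foldl (ibody last (d.getD (mask, last) 0)) d) :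
    ∀ (L : List Int), (∀ x ∈ L, 0 ≤ x ∧ x < n) →
    ∀ (s : PySem.Dict (Int × Int) Int),
    (∀ last, 0 ≤ last → last < n → M.testBit last.toNat = true →
      s.getD (mask, last) 0 = pvSpec (fun l prev => e prev l) nn M last.toNat) →
    ∀ key, (L.foldl lbody s).getD key 0
      = s.getD key 0 + (L.map (fun last => pvContrib e n nn M last key)).sum := by
  intro L
  induction L with
  | nil => intro _ s _ key; simp
  | cons a t ih =>
    intro hLb s hs key
    obtain ⟨ha0, han⟩ := hLb a List.mem_cons_self
    simp only [List.foldl_cons, List.map_cons, List.sum_cons]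
    rw [hlb s a]
    by_cases hb : PySem.Int.band (mask >>> a.toNat) 1 = 0
    · have htb : M.testBit a.toNat = false := by
        rw [hmask] at hb; rw [← pv_bitguard M a.toNat]; exact hb
      rw [if_pos hb, ih (fun x hx => hLb x (List.mem_cons_of_mem a hx)) s hs key]
      have : pvContrib e n nn M a key = 0 := by
        unfold pvContrib
        rw [if_neg (by rintro ⟨h1, _⟩; rw [htb] at h1; exact Bool.false_ne_true h1)]
      rw [this]
      ring
    · have htb : M.testBit a.toNat = true := by
        rw [hmask] at hb
        rcases Bool.eq_false_or_eq_true (M.testBit a.toNat) with h | h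
        · exact h
        · exact absurd ((pv_bitguard M a.toNat).mpr h) hb
      have hcs := hs a ha0 han htb
      by_cases hc : s.getD (mask, a) 0 = 0
      · rw [if_neg hb, if_pos hc, ih (fun x hx => hLb x (List.mem_cons_of_mem a hx)) s hs key]
        have : pvContrib e n nn M a key = 0 := by
          unfold pvContrib
          split
          · rw [← hcs, hc]
          · rfl
        rw [this]
        ring
      · rw [if_neg hb, if_neg hc]
        set c := s.getD (mask, a) 0 with hcdef
        set s' := (PySem.List.pyRange 0 n).foldl (ibody a c) s with hs'
        have hinner := pv_push_inner_range e n M mask hmask a c (ibody a c) (hib a c)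
        have hs'val : ∀ key2, s'.getD key2 0 = s.getD key2 0
            + (if 0 ≤ key2.2 ∧ key2.2 < n ∧ M.testBit key2.2.toNat = false
                ∧ ¬ e a key2.2 = 0 ∧ key2.1 = ((M + 2 ^ key2.2.toNat : Nat) : Int)
               then c else 0) := fun key2 => hinner s key2
        rw [ih (fun x hx => hLb x (List.mem_cons_of_mem a hx)) s' (by
          intro last h0 h1 h2
          rw [hs'val (mask, last)]
          rw [hs last h0 h1 h2]
          rw [if_neg (by
            rintro ⟨_, _, _, _, hk1⟩
            simp only [hmask] at hk1
            have : M = M + 2 ^ last.toNat := by exact_mod_cast hk1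
            have := Nat.two_pow_pos last.toNat
            omega)]
          ring) key]
      -- combine
        rw [hs'val key]
        have : (if 0 ≤ key.2 ∧ key.2 < n ∧ M.testBit key.2.toNat = false
                ∧ ¬ e a key.2 = 0 ∧ key.1 = ((M + 2 ^ key.2.toNat : Nat) : Int)
               then c else 0) = pvContrib e n nn M a key := by
          unfold pvContrib
          by_cases hcc : 0 ≤ key.2 ∧ key.2 < n ∧ M.testBit key.2.toNat = false
              ∧ ¬ e a key.2 = 0 ∧ key.1 = ((M + 2 ^ key.2.toNat : Nat) : Int)
          · obtain ⟨c1, c2, c3, c4, c5⟩ := hcc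
            rw [if_pos ⟨c1, c2, c3, c4, c5⟩, if_pos ⟨htb, ha0, han, c1, c2, c3, c4, c5⟩, hcs]
          · rw [if_neg hcc, if_neg (by rintro ⟨_, _, _, h⟩; exact hcc h)]
        rw [this]
        ring

theorem pv_push_step (e : Int → Int → Int) (n : Int) (hn : 0 ≤ n) (M : Nat) (hM : 1 ≤ M)
    (mask : Int) (hmask : mask = (M : Int))
    (ibody : Int → Int → PySem.Dict (Int × Int) Int → Int → PySem.Dict (Int × Int) Int)
    (hib : ∀ last cnt d nxt, ibody last cnt d nxt =
      if ¬ (PySem.Int.band (mask >>> nxt.toNat) 1 = 0) then d else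
      if e last nxt = 0 then d else
      d.insert (PySem.Int.bor mask ((1:Int) <<< nxt.toNat), nxt)
        (d.getD (PySem.Int.bor mask ((1:Int) <<< nxt.toNat), nxt) 0 + cnt))
    (lbody : PySem.Dict (Int × Int) Int → Int → PySem.Dict (Int × Int) Int)
    (hlb : ∀ d last, lbody d last =
      if PySem.Int.band (mask >>> last.toNat) 1 = 0 then d else
      if d.getD (mask, last) 0 = 0 then d else
      (PySem.List.pyRange 0 n).foldl (ibody last (d.getD (mask, last) 0)) d)
    (d : PySem.Dict (Int × Int) Int)
    (hd : ∀ key, d.getD key 0 = pvPushG e n (M - 1) key) :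
    ∀ key, ((PySem.List.pyRange 0 n).foldl lbody d).getD key 0 = pvPushG e n M key := by
  intro key
  rw [pv_push_lasts e n n.toNat M mask hmask ibody hib lbody hlb (PySem.List.pyRange 0 n)
      (fun x hx => PySem.List.mem_pyRange_one.mp hx) d (by
        intro last h0 h1 h2
        rw [hd (mask, last)]
        unfold pvPushG
        dsimp only
        rw [hmask, Int.toNat_natCast]
        rw [if_pos ⟨by positivity, h0, h1, h2, by
          have := Nat.ge_two_pow_of_testBit h2
          have := Nat.two_pow_pos last.toNat
          omega⟩]) key]
  rw [hd key]
  -- now pure arithmetic on pvPushG / contained sums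
  by_cases hK : 0 < key.1 ∧ 0 ≤ key.2 ∧ key.2 < n ∧ key.1.toNat.testBit key.2.toNat = true
  · obtain ⟨k1, k2, k3, k4⟩ := hK
    have hple := Nat.ge_two_pow_of_testBit k4
    have hppos := Nat.two_pow_pos key.2.toNat
    by_cases hp1 : key.1.toNat - 2 ^ key.2.toNat ≤ M - 1
    · -- already final before this mask
      have hcz : ∀ last ∈ PySem.List.pyRange 0 n, pvContrib e n n.toNat M last key = 0 := by
        intro last _
        unfold pvContrib
        rw [if_neg (by
          rintro ⟨_, _, _, _, _, _, _, hk1⟩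
          have : key.1.toNat = M + 2 ^ key.2.toNat := by omega
          omega)]
      rw [List.sum_eq_zero (by
        intro x hx
        simp only [List.mem_map] at hx
        obtain ⟨last, hlast, rfl⟩ := hx
        exact hcz last hlast)]
      unfold pvPushG
      rw [if_pos ⟨k1, k2, k3, k4, by omega⟩, if_pos ⟨k1, k2, k3, k4, by omega⟩]
      ring
    · by_cases hp2 : key.1.toNat - 2 ^ key.2.toNat = M
      · -- this mask finalizes the key
        have hm1 : key.1.toNat = M + 2 ^ key.2.toNat := by omega
        have hMtb : M.testBit key.2.toNat = false := by
          have := pv_testBit_sub key.1.toNat key.2.toNat k4 key.2.toNat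
          simp only [decide_true, Bool.not_true, Bool.and_false] at this
          rw [← hp2]
          exact this
        have hzero : pvPushG e n (M - 1) key = 0 := by
          unfold pvPushG
          rw [if_neg (by rintro ⟨_, _, _, _, h5⟩; omega)]
        rw [hzero, zero_add]
        unfold pvPushG
        rw [if_pos ⟨k1, k2, k3, k4, by omega⟩]
        -- sum equals the spec recursion
        have hneq : ¬ key.1.toNat = 2 ^ key.2.toNat := by omega
        have hl : key.2.toNat < n.toNat := by omega
        rw [pvSpec_eq_sum _ _ _ _ k4 hl hneq]
        rw [PySem.List.pyRange_zero]
        rw [List.map_map]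
        apply congrArg List.sum
        apply List.map_congr_left
        intro prev hprev
        rw [List.mem_range] at hprev
        simp only [Function.comp_apply]
        unfold pvContrib
        rw [hp2]
        rw [show ((key.2.toNat : Nat) : Int) = key.2 from by omega]
        rw [show ((prev : Nat) : Int).toNat = prev from Int.toNat_natCast prev]
        refine if_congr ⟨?_, ?_⟩ rfl rfl
        · rintro ⟨c1, _, _, _, _, _, c7, _⟩; exact ⟨c1, c7⟩
        · rintro ⟨c1, c2⟩
          exact ⟨c1, by omega, by omega, k2, k3, hMtb, c2, by omega⟩
      · -- key still untouched
        have hcz : ∀ last ∈ PySem.List.pyRange 0 n, pvContrib e n n.toNat M last key = 0 := by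
          intro last _
          unfold pvContrib
          rw [if_neg (by
            rintro ⟨_, _, _, _, _, _, _, hk1⟩
            have : key.1.toNat = M + 2 ^ key.2.toNat := by omega
            omega)]
        rw [List.sum_eq_zero (by
          intro x hx
          simp only [List.mem_map] at hx
          obtain ⟨last, hlast, rfl⟩ := hx
          exact hcz last hlast)]
        unfold pvPushG
        rw [if_neg (by rintro ⟨_, _, _, _, h5⟩; omega), if_neg (by rintro ⟨_, _, _, _, h5⟩; omega)]
        ring
  · -- malformed key: never written
    have hcz : ∀ last ∈ PySem.List.pyRange 0 n, pvContrib e n n.toNat M last key = 0 := by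
      intro last _
      unfold pvContrib
      rw [if_neg (by
        rintro ⟨_, _, _, c4, c5, c6, _, c8⟩
        refine hK ⟨by rw [c8]; positivity, c4, c5, ?_⟩
        have : key.1.toNat = M + 2 ^ key.2.toNat := by
          rw [c8]; exact Int.toNat_natCast _
        rw [this]
        exact pv_testBit_add M key.2.toNat c6 key.2.toNat ▸ (by simp))]
    rw [List.sum_eq_zero (by
      intro x hx
      simp only [List.mem_map] at hx
      obtain ⟨last, hlast, rfl⟩ := hx
      exact hcz last hlast)]
    unfold pvPushG
    rw [if_neg (by rintro ⟨c1, c2, c3, c4, _⟩; exact hK ⟨c1, c2, c3, c4⟩),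
      if_neg (by rintro ⟨c1, c2, c3, c4, _⟩; exact hK ⟨c1, c2, c3, c4⟩)]
    ring

def pvInitD (n : Int) : PySem.Dict (Int × Int) Int :=
  (PySem.List.pyRange 0 n).foldl
    (fun d v => d.insert (((1:Int) <<< v.toNat), v) 1) PySem.Dict.empty

theorem pv_init_eq_pushG (e : Int → Int → Int) (n : Int) (key : Int × Int) :
    (pvInitD n).getD key 0 = pvPushG e n 0 key := by
  unfold pvInitD
  simp only [Int.shiftLeft_natCast_right]
  rw [pv_init_aux key (PySem.List.pyRange 0 n) PySem.Dict.empty]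
  unfold pvPushG
  by_cases hx : ∃ v ∈ PySem.List.pyRange 0 n, key = (((1:Int) <<< v.toNat), v)
  · rw [if_pos hx]
    obtain ⟨v, hv, rfl⟩ := hx
    obtain ⟨hv0, hvn⟩ := PySem.List.mem_pyRange_one.mp hv
    dsimp only
    rw [pv_one_shift, Int.toNat_natCast]
    have htb : (2 ^ v.toNat).testBit v.toNat = true := Nat.testBit_two_pow_self
    rw [if_pos ⟨by positivity, hv0, hvn, htb, by omega⟩]
    rw [pvSpec_singleton _ _ _ (by omega)]
  · rw [if_neg hx, if_neg (by
      rintro ⟨c1, c2, c3, c4, c5⟩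
      apply hx
      refine ⟨key.2, PySem.List.mem_pyRange_one.mpr ⟨c2, c3⟩, ?_⟩
      have h1 := Nat.ge_two_pow_of_testBit c4
      have h2 : key.1.toNat = 2 ^ key.2.toNat := by omega
      have h3 : key.1 = ((2 ^ key.2.toNat : Nat) : Int) := by omega
      rw [← pv_one_shift] at h3
      exact Prod.ext_iff.mpr ⟨h3, rfl⟩), PySem.Dict.getD_empty]

theorem pv_push_outer (e : Int → Int → Int) (n : Int) (hn : 0 ≤ n)
    (ibody : Int → Int → Int → PySem.Dict (Int × Int) Int → Int → PySem.Dict (Int × Int) Int)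
    (hib : ∀ mask last cnt d nxt, ibody mask last cnt d nxt =
      if ¬ (PySem.Int.band (mask >>> nxt.toNat) 1 = 0) then d else
      if e last nxt = 0 then d else
      d.insert (PySem.Int.bor mask ((1:Int) <<< nxt.toNat), nxt)
        (d.getD (PySem.Int.bor mask ((1:Int) <<< nxt.toNat), nxt) 0 + cnt))
    (lbody : Int → PySem.Dict (Int × Int) Int → Int → PySem.Dict (Int × Int) Int)
    (hlb : ∀ mask d last, lbody mask d last =
      if PySem.Int.band (mask >>> last.toNat) 1 = 0 then d else
      if d.getD (mask, last) 0 = 0 then d else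
      (PySem.List.pyRange 0 n).foldl (ibody mask last (d.getD (mask, last) 0)) d)
    (mbody : PySem.Dict (Int × Int) Int → Int → PySem.Dict (Int × Int) Int)
    (hmb : ∀ d mask, mbody d mask = (PySem.List.pyRange 0 n).foldl (lbody mask) d) :
    ∀ (B : Nat) (Bint : Int), Bint = (B : Int) → ∀ (key : Int × Int),
    ((PySem.List.pyRange 1 Bint).foldl mbody (pvInitD n)).getD key 0
    = pvPushG e n (B - 1) key := by
  intro B
  induction B with
  | zero =>
    intro Bint hBint key
    subst hBint
    have hnil : PySem.List.pyRange 1 ((0:Nat) : Int) = [] :=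
      PySem.List.pyRange_one_eq_nil (by norm_num)
    rw [hnil, List.foldl_nil, show (0:Nat) - 1 = 0 from rfl]
    exact pv_init_eq_pushG e n key
  | succ B ih =>
    intro Bint hBint key
    subst hBint
    by_cases hB : B = 0
    · subst hB
      have hnil : PySem.List.pyRange 1 ((0+1:Nat) : Int) = [] :=
        PySem.List.pyRange_one_eq_nil (by norm_num)
      rw [hnil, List.foldl_nil, show (0+1:Nat) - 1 = 0 from rfl]
      exact pv_init_eq_pushG e n key
    · have h1B : (1:Int) ≤ (B : Int) := by omega
      rw [show ((B + 1 : Nat) : Int) = (B : Int) + 1 from by push_cast; ring,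
        PySem.List.pyRange_one_succ_right h1B, List.foldl_append, List.foldl_cons,
        List.foldl_nil, hmb]
      have hstep := pv_push_step e n hn B (by omega) ((B : Int)) rfl
        (ibody (B : Int)) (hib (B : Int)) (lbody (B : Int)) (hlb (B : Int))
        ((PySem.List.pyRange 1 (B : Int)).foldl mbody (pvInitD n))
        (fun key2 => ih (B : Int) rfl key2)
      rw [Nat.add_sub_cancel]
      exact hstep key

def pvFin (g : Int → Int → Int) (n : Int) (key : Int × Int) : Int :=
  if 0 ≤ key.1 ∧ 0 ≤ key.2 ∧ key.2 < n then pvSpec g n.toNat key.1.toNat key.2.toNat else 0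

theorem pv_pushG_final (e : Int → Int → Int) (n : Int) (key : Int × Int) :
    pvPushG e n (2 ^ n.toNat - 1) key = pvFin (fun l prev => e prev l) n key := by
  unfold pvPushG pvFin
  by_cases hc : 0 < key.1 ∧ 0 ≤ key.2 ∧ key.2 < n ∧ key.1.toNat.testBit key.2.toNat = true
  · obtain ⟨c1, c2, c3, c4⟩ := hc
    have hfc : 0 ≤ key.1 ∧ 0 ≤ key.2 ∧ key.2 < n := ⟨by omega, c2, c3⟩
    by_cases hb : key.1.toNat - 2 ^ key.2.toNat ≤ 2 ^ n.toNat - 1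
    · rw [if_pos ⟨c1, c2, c3, c4, hb⟩, if_pos hfc]
    · rw [if_neg (by rintro ⟨_, _, _, _, h5⟩; exact hb h5), if_pos hfc]
      have hhi : 2 ^ n.toNat ≤ key.1.toNat := by
        have := Nat.two_pow_pos key.2.toNat
        omega
      rw [pvSpec_high _ _ _ _ hhi]
  · by_cases hf : 0 ≤ key.1 ∧ 0 ≤ key.2 ∧ key.2 < n
    · rw [if_pos hf, if_neg (fun k => hc ⟨k.1, k.2.1, k.2.2.1, k.2.2.2.1⟩)]
      refine (pvSpec_of_not_bit _ _ _ _ ?_).symm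
      rintro ⟨hbit, _⟩
      by_cases h0 : key.1 = 0
      · rw [h0] at hbit
        simp [Nat.zero_testBit] at hbit
      · exact hc ⟨by omega, hf.2.1, hf.2.2, hbit⟩
    · rw [if_neg hf, if_neg (by
        rintro ⟨k1, k2, k3, _⟩
        exact hf ⟨by omega, k2, k3⟩)]

theorem pv_push_getD (e : Int → Int → Int) (n : Int) (hn : 0 ≤ n) (key : Int × Int) :
    (bHamEnd n e).getD key 0 = pvFin (fun l prev => e prev l) n key := by
  unfold bHamEnd
  refine Eq.trans (pv_push_outer e n hn
    (fun mask last cnt d nxt =>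
      if ¬ (PySem.Int.band (mask >>> nxt.toNat) 1 = 0) then d else
      if e last nxt = 0 then d else
      d.insert (PySem.Int.bor mask ((1:Int) <<< nxt.toNat), nxt)
        (d.getD (PySem.Int.bor mask ((1:Int) <<< nxt.toNat), nxt) 0 + cnt))
    (fun mask last cnt d nxt => by
      simp only [Int.shiftRight_natCast_right, Int.shiftLeft_natCast_right])
    (fun mask d last =>
      if PySem.Int.band (mask >>> last.toNat) 1 = 0 then d else
      if d.getD (mask, last) 0 = 0 then d else
      (PySem.List.pyRange 0 n).foldl
        ((fun mask last cnt d nxt =>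
          if ¬ (PySem.Int.band (mask >>> nxt.toNat) 1 = 0) then d else
          if e last nxt = 0 then d else
          d.insert (PySem.Int.bor mask ((1:Int) <<< nxt.toNat), nxt)
            (d.getD (PySem.Int.bor mask ((1:Int) <<< nxt.toNat), nxt) 0 + cnt))
          mask last (d.getD (mask, last) 0)) d)
    (fun mask d last => by
      simp only [Int.shiftRight_natCast_right, Int.shiftLeft_natCast_right])
    _
    (fun d mask => by
      simp only [Int.shiftRight_natCast_right, Int.shiftLeft_natCast_right])
    (2 ^ n.toNat) ((1:Int) <<< n.toNat) (by rw [pv_one_shift]) key)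
    (pv_pushG_final e n key)
def pvSufG (eT : Int → Int → Int) (n : Int) (pc : Nat) (key : Int × Int) : Int :=
  if 0 < key.1 ∧ 0 ≤ key.2 ∧ key.2 < n ∧ key.1.toNat.testBit key.2.toNat ∧
     PySem.Int.bitCount ((key.1.toNat : Nat) : Int) ≤ pc
  then pvSpec eT n.toNat key.1.toNat key.2.toNat else 0

def pvSufMid (eT : Int → Int → Int) (n : Int) (pc : Nat) (P : List Int) (key : Int × Int) : Int :=
  if 0 < key.1 ∧ 0 ≤ key.2 ∧ key.2 < n ∧ key.1.toNat.testBit key.2.toNat ∧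
     (PySem.Int.bitCount ((key.1.toNat : Nat) : Int) ≤ pc - 1 ∨
      (PySem.Int.bitCount ((key.1.toNat : Nat) : Int) = pc ∧ key.1 ∈ P))
  then pvSpec eT n.toNat key.1.toNat key.2.toNat else 0

-- accumulator loop computing `total`
theorem pv_suf_total_aux (tbody : Int → Int → Int) (term : Int → Int)
    (htb : ∀ t nxt, tbody t nxt = t + term nxt) :
    ∀ (L : List Int) (t : Int), L.foldl tbody t = t + (L.map term).sum := by
  intro L
  induction L with
  | nil => simp
  | cons a u ih =>
    intro t
    simp only [List.foldl_cons, List.map_cons, List.sum_cons]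
    rw [htb, ih]
    ring

theorem pv_suf_total (eT : Int → Int → Int) (n : Int) (hn : 0 ≤ n) (M : Nat) (mask : Int)
    (hmask : mask = (M : Int)) (first : Int) (hf0 : 0 ≤ first) (hfn : first < n)
    (hbit : M.testBit first.toNat = true) (hns : ¬ M = 2 ^ first.toNat)
    (d : PySem.Dict (Int × Int) Int)
    (hread : ∀ nxt : Nat, nxt < n.toNat → (M - 2 ^ first.toNat).testBit nxt = true →
      d.getD (((M - 2 ^ first.toNat : Nat) : Int), ((nxt : Nat) : Int)) 0
        = pvSpec eT n.toNat (M - 2 ^ first.toNat) nxt)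
    (tbody : Int → Int → Int)
    (htb : ∀ t nxt, tbody t nxt =
      if nxt = first then t else
      if PySem.Int.band (mask >>> nxt.toNat) 1 = 0 then t else
      if eT first nxt = 0 then t else
      t + d.getD (PySem.Int.band mask (Int.not ((1:Int) <<< first.toNat)), nxt) 0) :
    (PySem.List.pyRange 0 n).foldl tbody 0 = pvSpec eT n.toNat M first.toNat := by
  have hcb : PySem.Int.band mask (Int.not ((1:Int) <<< first.toNat))
      = ((M - 2 ^ first.toNat : Nat) : Int) := by
    rw [hmask]
    exact pv_clearbit M first.toNat hbit
  have htb' : ∀ t nxt, tbody t nxt = t +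
      (if nxt = first then 0 else
       if PySem.Int.band (mask >>> nxt.toNat) 1 = 0 then 0 else
       if eT first nxt = 0 then 0 else
       d.getD (((M - 2 ^ first.toNat : Nat) : Int), nxt) 0) := by
    intro t nxt
    rw [htb, hcb]
    split_ifs <;> ring
  rw [pv_suf_total_aux tbody _ htb', zero_add]
  rw [pvSpec_eq_sum eT n.toNat M first.toNat hbit (by omega) hns]
  rw [PySem.List.pyRange_zero, List.map_map]
  apply congrArg List.sum
  apply List.map_congr_left
  intro prev hprev
  rw [List.mem_range] at hprev
  simp only [Function.comp_apply]
  have hfirst : ((first.toNat : Nat) : Int) = first := by omega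
  have hptn : ((prev : Nat) : Int).toNat = prev := Int.toNat_natCast prev
  by_cases h1 : ((prev : Nat) : Int) = first
  · rw [if_pos h1]
    have : prev = first.toNat := by omega
    subst this
    rw [if_neg (by
      rintro ⟨hb, _⟩
      rw [pv_testBit_sub M first.toNat hbit first.toNat] at hb
      simp at hb)]
  · rw [if_neg h1]
    have hpf : ¬ (prev = first.toNat) := by omega
    by_cases h2 : PySem.Int.band (mask >>> ((prev : Nat) : Int).toNat) 1 = 0
    · rw [if_pos h2]
      rw [hmask, hptn] at h2
      have hb2 : M.testBit prev = false := (pv_bitguard M prev).mp h2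
      rw [if_neg (by
        rintro ⟨hb, _⟩
        rw [pv_testBit_sub M first.toNat hbit prev, hb2] at hb
        simp at hb)]
    · rw [if_neg h2]
      rw [hmask, hptn] at h2
      have hb2 : M.testBit prev = true := by
        rcases Bool.eq_false_or_eq_true (M.testBit prev) with h | h
        · exact h
        · exact absurd ((pv_bitguard M prev).mpr h) h2
      have hbsub : (M - 2 ^ first.toNat).testBit prev = true := by
        rw [pv_testBit_sub M first.toNat hbit prev, hb2]
        simp [hpf]
      by_cases h3 : eT first ((prev : Nat) : Int) = 0
      · rw [if_pos h3, if_neg (by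
          rintro ⟨_, he⟩
          rw [hfirst] at he
          exact he h3)]
      · rw [if_neg h3, if_pos ⟨hbsub, by rw [hfirst]; exact h3⟩]
        exact hread prev hprev hbsub

theorem pv_suf_onemask (eT : Int → Int → Int) (n : Int) (hn : 0 ≤ n) (M : Nat) (mask : Int)
    (hmask : mask = (M : Int)) (hns : ∀ f : Nat, ¬ M = 2 ^ f)
    (tbodyGen : PySem.Dict (Int × Int) Int → Int → Int → Int → Int)
    (htbg : ∀ d first t nxt, tbodyGen d first t nxt =
      if nxt = first then t else
      if PySem.Int.band (mask >>> nxt.toNat) 1 = 0 then t else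
      if eT first nxt = 0 then t else
      t + d.getD (PySem.Int.band mask (Int.not ((1:Int) <<< first.toNat)), nxt) 0)
    (fbody : PySem.Dict (Int × Int) Int → Int → PySem.Dict (Int × Int) Int)
    (hfb : ∀ d first, fbody d first =
      if PySem.Int.band (mask >>> first.toNat) 1 = 0 then d else
      if ((PySem.List.pyRange 0 n).foldl (tbodyGen d first) 0) > 0
      then d.insert (mask, first) ((PySem.List.pyRange 0 n).foldl (tbodyGen d first) 0) else d) :
    ∀ (L : List Int), (∀ x ∈ L, 0 ≤ x ∧ x < n) →
    ∀ (s : PySem.Dict (Int × Int) Int),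
    (∀ f : Nat, f < n.toNat → M.testBit f = true → ∀ nxt : Nat, nxt < n.toNat →
        (M - 2 ^ f).testBit nxt = true →
        s.getD (((M - 2 ^ f : Nat) : Int), ((nxt : Nat) : Int)) 0
          = pvSpec eT n.toNat (M - 2 ^ f) nxt) →
    (∀ f : Int, s.getD (mask, f) 0 = 0 ∨ s.getD (mask, f) 0 = pvSpec eT n.toNat M f.toNat) →
    ∀ key, (L.foldl fbody s).getD key 0
      = if key.1 = mask ∧ key.2 ∈ L ∧ 0 ≤ key.2 ∧ key.2 < n ∧ M.testBit key.2.toNat = true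
        then pvSpec eT n.toNat M key.2.toNat else s.getD key 0 := by
  intro L
  induction L with
  | nil =>
    intro _ s _ _ key
    rw [List.foldl_nil, if_neg (by rintro ⟨_, h, _⟩; exact absurd h (List.not_mem_nil))]
  | cons a t ih =>
    intro hLb s hreads hz key
    obtain ⟨ha0, han⟩ := hLb a List.mem_cons_self
    rw [List.foldl_cons, hfb s a]
    by_cases hb : PySem.Int.band (mask >>> a.toNat) 1 = 0
    · have htbf : M.testBit a.toNat = false := by
        rw [hmask] at hb; exact (pv_bitguard M a.toNat).mp hb
      rw [if_pos hb, ih (fun x hx => hLb x (List.mem_cons_of_mem a hx)) s hreads hz key]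
      refine if_congr ⟨?_, ?_⟩ rfl rfl
      · rintro ⟨c1, c2, c3⟩
        exact ⟨c1, List.mem_cons_of_mem a c2, c3⟩
      · rintro ⟨c1, c2, c3, c4, c5⟩
        rcases List.mem_cons.mp c2 with rfl | hm
        · rw [htbf] at c5; exact absurd c5 (by simp)
        · exact ⟨c1, hm, c3, c4, c5⟩
    · have htb : M.testBit a.toNat = true := by
        rcases Bool.eq_false_or_eq_true (M.testBit a.toNat) with h | h
        · exact h
        · rw [hmask] at hb; exact absurd ((pv_bitguard M a.toNat).mpr h) hb
      have htot : (PySem.List.pyRange 0 n).foldl (tbodyGen s a) 0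
          = pvSpec eT n.toNat M a.toNat :=
        pv_suf_total eT n hn M mask hmask a ha0 han htb (hns a.toNat) s
          (fun nxt h1 h2 => hreads a.toNat (by omega) htb nxt h1 h2)
          (tbodyGen s a) (htbg s a)
      rw [if_neg hb]
      have hMlt : ∀ f : Nat, M.testBit f = true → ((M - 2 ^ f : Nat) : Int) ≠ mask := by
        intro f hf
        rw [hmask]
        have h1 := Nat.ge_two_pow_of_testBit hf
        have h2 := Nat.two_pow_pos f
        intro hc
        have : M - 2 ^ f = M := by exact_mod_cast hc
        omega
      -- the state after processing a
      set s' := (if (PySem.List.pyRange 0 n).foldl (tbodyGen s a) 0 > 0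
        then s.insert (mask, a) ((PySem.List.pyRange 0 n).foldl (tbodyGen s a) 0) else s) with hs'
      have hgetd' : ∀ key2 : Int × Int, s'.getD key2 0 =
          if key2 = (mask, a) then pvSpec eT n.toNat M a.toNat else s.getD key2 0 := by
        intro key2
        rw [hs']
        by_cases htp : (PySem.List.pyRange 0 n).foldl (tbodyGen s a) 0 > 0
        · rw [if_pos htp, PySem.Dict.getD_insert]
          split_ifs with h
          · rw [htot]
          · rfl
        · rw [if_neg htp]
          split_ifs with h
          · subst h
            rcases hz a with h0 | h0
            · rw [h0]
              rw [htot] at htp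
              have := pvSpec_nonneg eT n.toNat M a.toNat
              omega
            · rw [h0]
          · rfl
      rw [ih (fun x hx => hLb x (List.mem_cons_of_mem a hx)) s' (by
          intro f h1 h2 nxt h3 h4
          rw [hgetd' _, if_neg (by
            intro hc
            exact hMlt f h2 (congrArg Prod.fst hc))]
          exact hreads f h1 h2 nxt h3 h4) (by
          intro f
          rw [hgetd' (mask, f)]
          split_ifs with h
          · right
            rw [show f = a from congrArg Prod.snd h]
          · exact hz f) key]
      rw [hgetd' key]
      by_cases hct : key.1 = mask ∧ key.2 ∈ t ∧ 0 ≤ key.2 ∧ key.2 < n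
          ∧ M.testBit key.2.toNat = true
      · rw [if_pos hct, if_pos ⟨hct.1, List.mem_cons_of_mem a hct.2.1, hct.2.2⟩]
      · rw [if_neg hct]
        by_cases hka : key = (mask, a)
        · rw [if_pos hka, if_pos (by
            rw [hka]
            exact ⟨rfl, List.mem_cons_self, ha0, han, htb⟩), hka]
        · rw [if_neg hka]
          rw [if_neg (by
            rintro ⟨c1, c2, c3, c4, c5⟩
            rcases List.mem_cons.mp c2 with h | hm
            · exact hka (Prod.ext_iff.mpr ⟨c1, h⟩)
            · exact hct ⟨c1, hm, c3, c4, c5⟩)]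

theorem pv_sufMid_congr (eT : Int → Int → Int) (n : Int) (pc : Nat) (P1 P2 : List Int)
    (hP : ∀ x, x ∈ P1 ↔ x ∈ P2) (key : Int × Int) :
    pvSufMid eT n pc P1 key = pvSufMid eT n pc P2 key := by
  unfold pvSufMid
  refine if_congr ⟨?_, ?_⟩ rfl rfl
  · rintro ⟨c1, c2, c3, c4, c5 | ⟨c5, c6⟩⟩
    · exact ⟨c1, c2, c3, c4, Or.inl c5⟩
    · exact ⟨c1, c2, c3, c4, Or.inr ⟨c5, (hP key.1).mp c6⟩⟩
  · rintro ⟨c1, c2, c3, c4, c5 | ⟨c5, c6⟩⟩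
    · exact ⟨c1, c2, c3, c4, Or.inl c5⟩
    · exact ⟨c1, c2, c3, c4, Or.inr ⟨c5, (hP key.1).mpr c6⟩⟩

theorem pv_suf_layer (eT : Int → Int → Int) (n : Int) (hn : 0 ≤ n) (pc : Nat) (hpc : 2 ≤ pc)
    (tbodyGen : Int → PySem.Dict (Int × Int) Int → Int → Int → Int → Int)
    (htbg : ∀ mask d first t nxt, tbodyGen mask d first t nxt =
      if nxt = first then t else
      if PySem.Int.band (mask >>> nxt.toNat) 1 = 0 then t else
      if eT first nxt = 0 then t else
      t + d.getD (PySem.Int.band mask (Int.not ((1:Int) <<< first.toNat)), nxt) 0)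
    (fbodyGen : Int → PySem.Dict (Int × Int) Int → Int → PySem.Dict (Int × Int) Int)
    (hfbg : ∀ mask d first, fbodyGen mask d first =
      if PySem.Int.band (mask >>> first.toNat) 1 = 0 then d else
      if ((PySem.List.pyRange 0 n).foldl (tbodyGen mask d first) 0) > 0
      then d.insert (mask, first) ((PySem.List.pyRange 0 n).foldl (tbodyGen mask d first) 0)
      else d)
    (glbody : PySem.Dict (Int × Int) Int → Int → PySem.Dict (Int × Int) Int)
    (hgl : ∀ d mask, glbody d mask =
      if ¬ ((PySem.Str.count (PySem.Int.pyBin mask) "1" : Int) = ((pc : Nat) : Int)) then d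
      else (PySem.List.pyRange 0 n).foldl (fbodyGen mask) d) :
    ∀ (L : List Int), (∀ x ∈ L, 1 ≤ x) → ∀ (P : List Int)
    (s : PySem.Dict (Int × Int) Int),
    (∀ key, s.getD key 0 = pvSufMid eT n pc P key) →
    ∀ key, (L.foldl glbody s).getD key 0
      = pvSufMid eT n pc
          (P ++ L.filter (fun m => decide (PySem.Int.bitCount ((m.toNat : Nat) : Int) = pc)))
          key := by
  intro L
  induction L with
  | nil =>
    intro _ P s hsmid key
    rw [List.foldl_nil, List.filter_nil, List.append_nil]
    exact hsmid key
  | cons a t ih =>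
    intro hL P s hsmid key
    have ha1 : (1:Int) ≤ a := hL a List.mem_cons_self
    have haN : a = ((a.toNat : Nat) : Int) := by omega
    rw [List.foldl_cons, hgl s a, List.filter_cons]
    have hguard : ((PySem.Str.count (PySem.Int.pyBin a) "1" : Int) = ((pc : Nat) : Int))
        ↔ PySem.Int.bitCount ((a.toNat : Nat) : Int) = pc := by
      rw [count_pyBin_one a (by omega)]
      constructor
      · intro h
        have h2 : PySem.Int.bitCount a = pc := by exact_mod_cast h
        rw [← haN]
        exact h2
      · intro h
        have h2 : PySem.Int.bitCount a = pc := by rw [haN]; exact h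
        exact_mod_cast congrArg (fun x : Nat => ((x : Nat) : Int)) h2
    by_cases hg : PySem.Int.bitCount ((a.toNat : Nat) : Int) = pc
    · rw [if_neg (by rw [hguard]; exact not_not_intro hg), if_pos (by simpa using hg)]
      set M := a.toNat with hMdef
      have hM1 : 1 ≤ M := by omega
      have hns : ∀ f : Nat, ¬ M = 2 ^ f := by
        intro f hc
        have htb : M.testBit f = true := by rw [hc]; exact Nat.testBit_two_pow_self
        have := (pv_bc_one M f htb).mpr hc
        omega
      have hone := pv_suf_onemask eT n hn M a haN hns (tbodyGen a) (htbg a)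
        (fbodyGen a) (hfbg a) (PySem.List.pyRange 0 n)
        (fun x hx => PySem.List.mem_pyRange_one.mp hx) s
        (by
          intro f h1 h2 nxt h3 h4
          rw [hsmid _]
          unfold pvSufMid
          have hge := Nat.ge_two_pow_of_testBit h2
          have hMne := hns f
          have hbc := pv_bc_sub M f h2
          rw [if_pos (by
            refine ⟨by dsimp only; omega, by dsimp only; omega, by dsimp only; omega, ?_, ?_⟩
            · dsimp only
              rw [Int.toNat_natCast, Int.toNat_natCast]
              exact h4
            · left
              dsimp only
              rw [Int.toNat_natCast]
              omega)]
          dsimp only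
          rw [Int.toNat_natCast, Int.toNat_natCast])
        (by
          intro f
          rw [hsmid (a, f)]
          unfold pvSufMid
          split_ifs with h
          · right
            rfl
          · left
            rfl)
      -- state after the whole mask a is exactly pvSufMid with a recorded
      have hs2 : ∀ key2, ((PySem.List.pyRange 0 n).foldl (fbodyGen a) s).getD key2 0
          = pvSufMid eT n pc (P ++ [a]) key2 := by
        intro key2
        rw [hone key2]
        by_cases hc1 : key2.1 = a ∧ key2.2 ∈ PySem.List.pyRange 0 n ∧ 0 ≤ key2.2
            ∧ key2.2 < n ∧ M.testBit key2.2.toNat = true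
        · obtain ⟨d1, d2, d3, d4, d5⟩ := hc1
          rw [if_pos ⟨d1, d2, d3, d4, d5⟩]
          unfold pvSufMid
          rw [if_pos ⟨by omega, d3, d4, by rw [d1]; exact d5, Or.inr ⟨by rw [d1]; exact hg,
            by rw [d1]; exact List.mem_append_right P List.mem_cons_self⟩⟩]
          rw [show key2.1.toNat = M from by rw [d1]]
        · rw [if_neg hc1, hsmid key2]
          unfold pvSufMid
          by_cases hka : key2.1 = a
          · by_cases hK : 0 < key2.1 ∧ 0 ≤ key2.2 ∧ key2.2 < n
                ∧ key2.1.toNat.testBit key2.2.toNat = true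
            · refine absurd ⟨hka, PySem.List.mem_pyRange_one.mpr ⟨hK.2.1, hK.2.2.1⟩,
                hK.2.1, hK.2.2.1, ?_⟩ hc1
              have hkk : key2.1.toNat = M := by rw [hka]
              exact hkk ▸ hK.2.2.2
            · rw [if_neg (by rintro ⟨c1, c2, c3, c4, _⟩; exact hK ⟨c1, c2, c3, c4⟩),
                if_neg (by rintro ⟨c1, c2, c3, c4, _⟩; exact hK ⟨c1, c2, c3, c4⟩)]
          · refine if_congr ⟨?_, ?_⟩ rfl rfl
            · rintro ⟨c1, c2, c3, c4, c5 | ⟨c5, c6⟩⟩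
              · exact ⟨c1, c2, c3, c4, Or.inl c5⟩
              · exact ⟨c1, c2, c3, c4, Or.inr ⟨c5, List.mem_append_left [a] c6⟩⟩
            · rintro ⟨c1, c2, c3, c4, c5 | ⟨c5, c6⟩⟩
              · exact ⟨c1, c2, c3, c4, Or.inl c5⟩
              · rcases List.mem_append.mp c6 with h | h
                · exact ⟨c1, c2, c3, c4, Or.inr ⟨c5, h⟩⟩
                · exact absurd (List.mem_singleton.mp h) hka
      rw [ih (fun x hx => hL x (List.mem_cons_of_mem a hx)) (P ++ [a])
        ((PySem.List.pyRange 0 n).foldl (fbodyGen a) s) hs2 key]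
      exact pv_sufMid_congr eT n pc _ _ (by
        intro x
        simp only [List.mem_append, List.mem_singleton, List.mem_cons]
        tauto) key
    · rw [if_pos (by rw [hguard]; exact hg), if_neg (by simpa using hg)]
      exact ih (fun x hx => hL x (List.mem_cons_of_mem a hx)) P s hsmid key

theorem pv_init_eq_sufG (eT : Int → Int → Int) (n : Int) (key : Int × Int) :
    (pvInitD n).getD key 0 = pvSufG eT n 1 key := by
  unfold pvInitD
  simp only [Int.shiftLeft_natCast_right]
  rw [pv_init_aux key (PySem.List.pyRange 0 n) PySem.Dict.empty]
  unfold pvSufG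
  by_cases hx : ∃ v ∈ PySem.List.pyRange 0 n, key = (((1:Int) <<< v.toNat), v)
  · rw [if_pos hx]
    obtain ⟨v, hv, rfl⟩ := hx
    obtain ⟨hv0, hvn⟩ := PySem.List.mem_pyRange_one.mp hv
    dsimp only
    rw [pv_one_shift, Int.toNat_natCast]
    have htb : (2 ^ v.toNat).testBit v.toNat = true := Nat.testBit_two_pow_self
    rw [if_pos ⟨by positivity, hv0, hvn, htb, le_of_eq ((pv_bc_one _ _ htb).mpr rfl)⟩]
    rw [pvSpec_singleton _ _ _ (by omega)]
  · rw [if_neg hx, if_neg (by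
      rintro ⟨c1, c2, c3, c4, c5⟩
      apply hx
      refine ⟨key.2, PySem.List.mem_pyRange_one.mpr ⟨c2, c3⟩, ?_⟩
      have hb1 : 1 ≤ PySem.Int.bitCount ((key.1.toNat : Nat) : Int) :=
        bitCount_pos key.1.toNat (by omega)
      have hbc : PySem.Int.bitCount ((key.1.toNat : Nat) : Int) = 1 := by omega
      have h2 : key.1.toNat = 2 ^ key.2.toNat := (pv_bc_one _ _ c4).mp hbc
      have h3 : key.1 = ((2 ^ key.2.toNat : Nat) : Int) := by omega
      rw [← pv_one_shift] at h3
      exact Prod.ext_iff.mpr ⟨h3, rfl⟩), PySem.Dict.getD_empty]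

theorem pv_sufG_eq_mid (eT : Int → Int → Int) (n : Int) (pc : Nat) (key : Int × Int) :
    pvSufG eT n pc key = pvSufMid eT n (pc + 1) [] key := by
  unfold pvSufG pvSufMid
  refine if_congr ⟨?_, ?_⟩ rfl rfl
  · rintro ⟨c1, c2, c3, c4, c5⟩
    exact ⟨c1, c2, c3, c4, Or.inl (by omega)⟩
  · rintro ⟨c1, c2, c3, c4, c5 | ⟨_, c6⟩⟩
    · exact ⟨c1, c2, c3, c4, by omega⟩
    · exact absurd c6 (List.not_mem_nil)

theorem pv_mid_full_eq_sufG (eT : Int → Int → Int) (n : Int) (hn : 0 ≤ n) (pc : Nat)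
    (hpc : 1 ≤ pc) (bound : Int) (hbound : bound = ((2 ^ n.toNat : Nat) : Int))
    (key : Int × Int) :
    pvSufMid eT n pc
      ((PySem.List.pyRange 1 bound).filter
        (fun m => decide (PySem.Int.bitCount ((m.toNat : Nat) : Int) = pc))) key
    = pvSufG eT n pc key := by
  unfold pvSufMid pvSufG
  by_cases hK : 0 < key.1 ∧ 0 ≤ key.2 ∧ key.2 < n ∧ key.1.toNat.testBit key.2.toNat = true
  · obtain ⟨c1, c2, c3, c4⟩ := hK
    by_cases hb1 : PySem.Int.bitCount ((key.1.toNat : Nat) : Int) ≤ pc - 1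
    · rw [if_pos ⟨c1, c2, c3, c4, Or.inl hb1⟩, if_pos ⟨c1, c2, c3, c4, by omega⟩]
    · by_cases hb2 : PySem.Int.bitCount ((key.1.toNat : Nat) : Int) = pc
      · by_cases hlt : key.1.toNat < 2 ^ n.toNat
        · rw [if_pos ⟨c1, c2, c3, c4, Or.inr ⟨hb2, List.mem_filter.mpr
            ⟨PySem.List.mem_pyRange_one.mpr ⟨by omega, by omega⟩, by simpa using hb2⟩⟩⟩,
            if_pos ⟨c1, c2, c3, c4, by omega⟩]
        · rw [if_neg (by
            rintro ⟨_, _, _, _, h5 | ⟨_, h6⟩⟩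
            · exact hb1 h5
            · obtain ⟨hmem, _⟩ := List.mem_filter.mp h6
              obtain ⟨hm1, hm2⟩ := PySem.List.mem_pyRange_one.mp hmem
              rw [hbound] at hm2
              omega),
            if_pos ⟨c1, c2, c3, c4, by omega⟩]
          rw [pvSpec_high _ _ _ _ (by omega)]
      · rw [if_neg (by rintro ⟨_, _, _, _, h5 | ⟨h6, _⟩⟩; exact hb1 h5; exact hb2 h6),
          if_neg (by rintro ⟨_, _, _, _, h5⟩; omega)]
  · rw [if_neg (by rintro ⟨c1, c2, c3, c4, _⟩; exact hK ⟨c1, c2, c3, c4⟩),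
      if_neg (by rintro ⟨c1, c2, c3, c4, _⟩; exact hK ⟨c1, c2, c3, c4⟩)]

theorem pv_sufG_final (eT : Int → Int → Int) (n : Int) (pcm : Nat) (hpcm : n.toNat ≤ pcm)
    (key : Int × Int) :
    pvSufG eT n pcm key = pvFin eT n key := by
  unfold pvSufG pvFin
  by_cases hK : 0 < key.1 ∧ 0 ≤ key.2 ∧ key.2 < n ∧ key.1.toNat.testBit key.2.toNat = true
  · obtain ⟨c1, c2, c3, c4⟩ := hK
    have hfc : 0 ≤ key.1 ∧ 0 ≤ key.2 ∧ key.2 < n := ⟨by omega, c2, c3⟩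
    by_cases hb : PySem.Int.bitCount ((key.1.toNat : Nat) : Int) ≤ pcm
    · rw [if_pos ⟨c1, c2, c3, c4, hb⟩, if_pos hfc]
    · rw [if_neg (by rintro ⟨_, _, _, _, h5⟩; exact hb h5), if_pos hfc]
      have hge : 2 ^ n.toNat ≤ key.1.toNat := by
        by_contra hc
        exact hb (le_trans (pv_bc_le n.toNat key.1.toNat (by omega)) hpcm)
      rw [pvSpec_high _ _ _ _ hge]
  · by_cases hf : 0 ≤ key.1 ∧ 0 ≤ key.2 ∧ key.2 < n
    · rw [if_pos hf, if_neg (by rintro ⟨c1, c2, c3, c4, _⟩; exact hK ⟨c1, c2, c3, c4⟩)]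
      refine (pvSpec_of_not_bit _ _ _ _ ?_).symm
      rintro ⟨hbit, _⟩
      by_cases h0 : key.1 = 0
      · rw [h0] at hbit
        simp [Nat.zero_testBit] at hbit
      · exact hK ⟨by omega, hf.2.1, hf.2.2, hbit⟩
    · rw [if_neg hf, if_neg (by
        rintro ⟨k1, k2, k3, _⟩
        exact hf ⟨by omega, k2, k3⟩)]

theorem pv_suf_outer (eT : Int → Int → Int) (n : Int) (hn : 0 ≤ n) (bound : Int)
    (hbound : bound = ((2 ^ n.toNat : Nat) : Int))
    (tbodyGen : Int → PySem.Dict (Int × Int) Int → Int → Int → Int → Int)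
    (htbg : ∀ mask d first t nxt, tbodyGen mask d first t nxt =
      if nxt = first then t else
      if PySem.Int.band (mask >>> nxt.toNat) 1 = 0 then t else
      if eT first nxt = 0 then t else
      t + d.getD (PySem.Int.band mask (Int.not ((1:Int) <<< first.toNat)), nxt) 0)
    (fbodyGen : Int → PySem.Dict (Int × Int) Int → Int → PySem.Dict (Int × Int) Int)
    (hfbg : ∀ mask d first, fbodyGen mask d first =
      if PySem.Int.band (mask >>> first.toNat) 1 = 0 then d else
      if ((PySem.List.pyRange 0 n).foldl (tbodyGen mask d first) 0) > 0
      then d.insert (mask, first) ((PySem.List.pyRange 0 n).foldl (tbodyGen mask d first) 0)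
      else d)
    (glbodyGen : Int → PySem.Dict (Int × Int) Int → Int → PySem.Dict (Int × Int) Int)
    (hglg : ∀ pcI d mask, glbodyGen pcI d mask =
      if ¬ ((PySem.Str.count (PySem.Int.pyBin mask) "1" : Int) = pcI) then d
      else (PySem.List.pyRange 0 n).foldl (fbodyGen mask) d)
    (obody : PySem.Dict (Int × Int) Int → Int → PySem.Dict (Int × Int) Int)
    (hob : ∀ d pcI, obody d pcI = (PySem.List.pyRange 1 bound).foldl (glbodyGen pcI) d) :
    ∀ (k : Nat) (ub : Int), ub = ((k + 2 : Nat) : Int) →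
    ∀ key, ((PySem.List.pyRange 2 ub).foldl obody (pvInitD n)).getD key 0
      = pvSufG eT n (k + 1) key := by
  intro k
  induction k with
  | zero =>
    intro ub hub key
    subst hub
    have hnil : PySem.List.pyRange 2 ((0 + 2 : Nat) : Int) = [] :=
      PySem.List.pyRange_one_eq_nil (by norm_num)
    rw [hnil, List.foldl_nil]
    exact pv_init_eq_sufG eT n key
  | succ k ih =>
    intro ub hub key
    subst hub
    rw [show ((k + 1 + 2 : Nat) : Int) = ((k + 2 : Nat) : Int) + 1 from by push_cast; ring,
      PySem.List.pyRange_one_succ_right (by push_cast; omega), List.foldl_append,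
      List.foldl_cons, List.foldl_nil, hob]
    rw [pv_suf_layer eT n hn (k + 2) (by omega) tbodyGen htbg fbodyGen hfbg
      (glbodyGen ((k + 2 : Nat) : Int)) (hglg ((k + 2 : Nat) : Int))
      (PySem.List.pyRange 1 bound)
      (fun x hx => (PySem.List.mem_pyRange_one.mp hx).1) []
      ((PySem.List.pyRange 2 ((k + 2 : Nat) : Int)).foldl obody (pvInitD n))
      (fun key2 => (ih ((k + 2 : Nat) : Int) rfl key2).trans
        (pv_sufG_eq_mid eT n (k + 1) key2)) key]
    rw [List.nil_append]
    exact pv_mid_full_eq_sufG eT n hn (k + 2) (by omega) bound hbound key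
theorem pv_suf_getD (T : List (List Int × Int)) (n : Int) (hn : 0 ≤ n) (key : Int × Int) :
    (aSuf T n).getD key 0 = pvFin (fun a b => pvTget T a b) n key := by
  unfold aSuf
  by_cases h0 : n = 0
  · subst h0
    have hnil : PySem.List.pyRange 2 ((0:Int) + 1) = [] :=
      PySem.List.pyRange_one_eq_nil (by norm_num)
    rw [hnil, List.foldl_nil]
    exact (pv_init_eq_sufG (fun a b => pvTget T a b) 0 key).trans
      (pv_sufG_final (fun a b => pvTget T a b) 0 1 (by norm_num) key)
  · have hub : n + 1 = (((n.toNat - 1) + 2 : Nat) : Int) := by omega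
    rw [hub]
    refine Eq.trans (pv_suf_outer (fun a b => pvTget T a b) n hn
      ((1:Int) <<< n.toNat) (by rw [pv_one_shift])
      (fun mask d first t nxt =>
        if nxt = first then t else
        if PySem.Int.band (mask >>> nxt.toNat) 1 = 0 then t else
        if pvTget T first nxt = 0 then t else
        t + d.getD (PySem.Int.band mask (Int.not ((1:Int) <<< first.toNat)), nxt) 0)
      (fun mask d first t nxt => by
        simp only [Int.shiftRight_natCast_right, Int.shiftLeft_natCast_right])
      (fun mask d first =>
        if PySem.Int.band (mask >>> first.toNat) 1 = 0 then d else
        if ((PySem.List.pyRange 0 n).foldl ((fun mask d first t nxt =>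
            if nxt = first then t else
            if PySem.Int.band (mask >>> nxt.toNat) 1 = 0 then t else
            if pvTget T first nxt = 0 then t else
            t + d.getD (PySem.Int.band mask (Int.not ((1:Int) <<< first.toNat)), nxt) 0)
            mask d first) 0) > 0
        then d.insert (mask, first) ((PySem.List.pyRange 0 n).foldl ((fun mask d first t nxt =>
            if nxt = first then t else
            if PySem.Int.band (mask >>> nxt.toNat) 1 = 0 then t else
            if pvTget T first nxt = 0 then t else
            t + d.getD (PySem.Int.band mask (Int.not ((1:Int) <<< first.toNat)), nxt) 0)
            mask d first) 0)
        else d)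
      (fun mask d first => by
        simp only [Int.shiftRight_natCast_right, Int.shiftLeft_natCast_right])
      (fun pcI d mask =>
        if ¬ ((PySem.Str.count (PySem.Int.pyBin mask) "1" : Int) = pcI) then d
        else pvSufBody T n d mask)
      (fun pcI d mask => by
        unfold pvSufBody
        simp only [Int.shiftRight_natCast_right, Int.shiftLeft_natCast_right])
      _
      (fun d pcI => by
        simp only [Int.shiftRight_natCast_right, Int.shiftLeft_natCast_right])
      (n.toNat - 1) (((n.toNat - 1) + 2 : Nat) : Int) rfl key)
      (pv_sufG_final (fun a b => pvTget T a b) n (n.toNat - 1 + 1) (by omega) key)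

-- ===== VERDICT (by name: the statement is the Claim_ definition above) =====
theorem compute_f_dp_spec : Claim_equal_compute_f_dp := by
  intro T n _ hn
  unfold Spec_compute_f_dp compute_f_dp compute_f_dp_alt
  show (aF T n (aDp T n) (aSuf T n), pvH n (aDp T n))
      = (bF T n (bHamEnd n (fun a b => pvTget T a b)) (bHamEnd n (fun a b => pvTget T b a)),
         pvH n (bHamEnd n (fun a b => pvTget T a b)))
  have hdp : bHamEnd n (fun a b => pvTget T a b) = aDp T n := rfl
  rw [hdp, bF_eq_aF]
  have hsuf : ∀ key, (aSuf T n).getD key 0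
      = (bHamEnd n (fun a b => pvTget T b a)).getD key 0 := by
    intro key
    rw [pv_suf_getD T n hn key, pv_push_getD (fun a b => pvTget T b a) n hn key]
  rw [aF_congr_suf T n (aDp T n) (aSuf T n) (bHamEnd n (fun a b => pvTget T b a)) hsuf]
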